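-- pv_equiv track=rewrite | github.com/GaoLabXDU/HiSV | HiSV_code/combine_result.py | group_position
-- ===== SOURCE A (Python) =====
-- from collections import defaultdict
--
-- def group_1(data):
--     last = data[0]
--     start = end = 0
--     for n in data[1:]:
--         if n - last == 1:  # Part of the group, bump the end
--             last = n
--             end += 1
--         else:  # Not part of the group, yield current group and start a new
--             yield range(data[start], data[end] + 1)
--             last = n
--             start = end = end + 1
--     # yield start, end
--     yield range(data[start], data[end] + 1)
--
-- def group_position(pos1list, pos2list, binsize):
--     result = defaultdict(list)
--     l1 = sorted(set(pos1list), key=pos1list.index)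
--     pos1group = list(group_1(l1))
--     for i in range(len(pos1group)):
--         start_pos = pos1list.index(pos1group[i][0])
--         end_pos = len(pos1list) - 1 - pos1list[::-1].index(pos1group[i][-1])
--         cur_pos2_list = pos2list[start_pos:end_pos + 1]
--         cur_pos1_list = pos1list[start_pos:end_pos + 1]
--         cur_pos2_list_sort = sorted(cur_pos2_list)
--         l2 = sorted(set(cur_pos2_list_sort), key=cur_pos2_list_sort.index)
--         pos2group = list(group_1(l2))
--         if len(pos2group) > 1:
--             for j in range(len(pos2group)):
--                 new_pos1 = []
--                 for k in range(len(pos2group[j])):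
--                     if pos2group[j][k] in cur_pos2_list:
--                         pos = cur_pos2_list.index(pos2group[j][k])
--                         new_pos1.append(cur_pos1_list[pos])
--                 '''
--                 for m in range(len(pos1list)):
--                     if pos2list[m] in pos2group[j]:
--                         new_pos1.append(pos1list[m])
--
--                 for m in range(len(cur_pos1_list)):
--                     if pos2list[m] in cur_pos2_list:
--                         new_pos1.append(cur_pos1_list[m])
--                 '''
--                 new_pos1 = sorted(new_pos1)
--                 result['pos1_start'].append(new_pos1[0] * binsize)
--                 result['pos1_end'].append(new_pos1[-1] * binsize + binsize)
--                 result['pos2_start'].append(pos2group[j][0] * binsize)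
--                 result['pos2_end'].append(pos2group[j][-1] * binsize + binsize)
--
--         else:
--             result['pos1_start'].append(pos1group[i][0] * binsize)
--             result['pos1_end'].append(pos1group[i][-1] * binsize + binsize)
--             result['pos2_start'].append(pos2group[0][0] * binsize)
--             result['pos2_end'].append(pos2group[0][-1] * binsize + binsize)
--     return result
-- ===== SOURCE B (Python) =====
-- def group_position(pos1list, pos2list, binsize):
--     # last occurrence index of each pos1 value, one pass
--     last = {}
--     for i, v in enumerate(pos1list):
--         last[v] = i
--
--     def flush(lo, hi, s):
--         # one pos1 run [lo..hi] whose slice starts at s (first index of lo)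
--         e = last[hi]
--         cur2 = pos2list[s:e + 1]
--         cur1 = pos1list[s:e + 1]
--         m = {}
--         for v, p in zip(cur2, cur1):
--             if v not in m:
--                 m[v] = p
--         # fused grouping + min/max aggregation over the sorted distinct pos2 values
--         recs = []
--         started = False
--         for v in sorted(m):
--             p = m[v]
--             if started and v - hi2 == 1:
--                 hi2 = v
--                 if p < mn:
--                     mn = p
--                 if p > mx:
--                     mx = p
--             else:
--                 if started:
--                     recs.append((mn, mx, lo2, hi2))
--                 lo2 = hi2 = v
--                 mn = mx = p
--                 started = True
--         recs.append((mn, mx, lo2, hi2))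
--         if len(recs) == 1:
--             recs = [(lo, hi, lo2, hi2)]
--         return recs
--
--     # fused scan: dedup (via seen set) + consecutive-run detection over pos1list
--     recs = []
--     seen = set()
--     started = False
--     for i, v in enumerate(pos1list):
--         if v in seen:
--             continue
--         seen.add(v)
--         if started and v - hi1 == 1:
--             hi1 = v
--         else:
--             if started:
--                 recs.extend(flush(lo1, hi1, s1))
--             lo1 = hi1 = v
--             s1 = i
--             started = True
--     recs.extend(flush(lo1, hi1, s1))
--     return {'pos1_start': [a * binsize for a, _, _, _ in recs],
--             'pos1_end': [b * binsize + binsize for _, b, _, _ in recs],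
--             'pos2_start': [c * binsize for _, _, c, _ in recs],
--             'pos2_end': [d * binsize + binsize for _, _, _, d in recs]}
-- ===== Notes on version B (the rewrite author's own statement) =====
-- stated objective: faster
-- what changed: B replaces A's staged passes (build a dedup list then a grouping generator, re-scan with list.index / reversed-list.index per run, and per pos2 sub-run do membership tests plus list.index per value and a sort just to take the extremes) by one fused seen-set scan over pos1list that detects runs and flushes them on the fly, a first-occurrence dict per slice, and a single fold over the sorted distinct pos2 values that groups consecutive values and aggregates min/max pos1 as it goes.
-- outside the precondition, e.g. on group_position([1, 3], [5], 1): A raises IndexError, B raises UnboundLocalError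
import Mathlib
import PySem

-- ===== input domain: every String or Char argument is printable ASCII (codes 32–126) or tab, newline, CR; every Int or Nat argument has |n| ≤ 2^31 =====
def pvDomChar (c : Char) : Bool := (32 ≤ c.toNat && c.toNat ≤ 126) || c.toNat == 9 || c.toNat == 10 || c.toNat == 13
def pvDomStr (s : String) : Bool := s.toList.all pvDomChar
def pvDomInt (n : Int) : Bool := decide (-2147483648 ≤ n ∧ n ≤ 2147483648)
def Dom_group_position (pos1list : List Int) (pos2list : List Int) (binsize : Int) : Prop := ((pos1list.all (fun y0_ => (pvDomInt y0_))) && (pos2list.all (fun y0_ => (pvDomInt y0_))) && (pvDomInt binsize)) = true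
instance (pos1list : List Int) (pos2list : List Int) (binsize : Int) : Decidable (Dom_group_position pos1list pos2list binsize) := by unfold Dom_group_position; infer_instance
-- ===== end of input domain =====

-- B replaces A's staged passes (dedup list + grouping generator, repeated list.index /
-- reversed-list.index / membership+index scans, sorting each group's collected values) by one
-- fused seen-set scan over pos1list that detects runs on the fly, a first-occurrence map per
-- slice, and a single fold over the sorted distinct pos2 values that groups and aggregates
-- min/max as it goes; objective: faster (measured).

-- ===== PORT A =====
-- the loop of group_1 (A): state last/start/end over data, yielding range(data[start], data[end]+1)
def pvG1Loop (data : List Int) (rest : List Int) (last start_ end_ : Int)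
    (acc : List (List Int)) : List (List Int) :=
  match rest with
  | [] => acc ++ [PySem.List.pyRange (PySem.List.pyGetD data start_ 0) (PySem.List.pyGetD data end_ 0 + 1)]
  | n :: t =>
    if n - last == 1 then
      pvG1Loop data t n start_ (end_ + 1) acc
    else
      pvG1Loop data t n (end_ + 1) (end_ + 1)
        (acc ++ [PySem.List.pyRange (PySem.List.pyGetD data start_ 0) (PySem.List.pyGetD data end_ 0 + 1)])

-- group_1(data); data[0] raises IndexError on [] (excluded by Pre_); pyGetD is exact in range
def pvGroup1 (data : List Int) : List (List Int) :=
  pvG1Loop data (PySem.List.slice data (some 1) none) (PySem.List.pyGetD data 0 0) 0 0 []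

-- A's body; list.index / dict accesses that cannot fail under Pre_ are ported with .getD;
-- the three loop bodies are named helpers (same code, factored for readability)
def pvAKBody (cur_pos2_list cur_pos1_list : List Int) (np : List Int) (v : Int) : List Int :=
  if cur_pos2_list.contains v then
    np ++ [PySem.List.pyGetD cur_pos1_list
      (((PySem.List.index? cur_pos2_list v).getD 0 : Nat) : Int) 0]
  else np

def pvAJBody (cur_pos2_list cur_pos1_list : List Int) (binsize : Int)
    (result : PySem.Dict String (List Int)) (grp : List Int) : PySem.Dict String (List Int) :=
  let np0 := (PySem.List.pyRange 0 (PySem.List.len grp)).foldl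
    (fun np k => pvAKBody cur_pos2_list cur_pos1_list np (PySem.List.pyGetD grp k 0)) []
  let new_pos1 := PySem.List.sorted np0 (fun x => x)
  (((result.modify "pos1_start" [] (fun x => x ++ [PySem.List.pyGetD new_pos1 0 0 * binsize])).modify
      "pos1_end" [] (fun x => x ++ [PySem.List.pyGetD new_pos1 (-1) 0 * binsize + binsize])).modify
      "pos2_start" [] (fun x => x ++ [PySem.List.pyGetD grp 0 0 * binsize])).modify
      "pos2_end" [] (fun x => x ++ [PySem.List.pyGetD grp (-1) 0 * binsize + binsize])

def pvACtx (pos1list pos2list : List Int) (g : List Int) : List Int × List Int × List Int :=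
  let start_pos : Int := ((PySem.List.index? pos1list (PySem.List.pyGetD g 0 0)).getD 0 : Nat)
  let end_pos : Int := PySem.List.len pos1list - 1 -
    ((PySem.List.index? ((PySem.List.slice? pos1list none none (-1)).getD [])
        (PySem.List.pyGetD g (-1) 0)).getD 0 : Nat)
  let cur_pos2_list := PySem.List.slice pos2list (some start_pos) (some (end_pos + 1))
  let cur_pos1_list := PySem.List.slice pos1list (some start_pos) (some (end_pos + 1))
  let cur_pos2_list_sort := PySem.List.sorted cur_pos2_list (fun x => x)
  (cur_pos2_list, cur_pos1_list,
   PySem.List.sorted (PySem.Set.ofList cur_pos2_list_sort)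
     (fun v => (PySem.List.index? cur_pos2_list_sort v).getD 0))

def pvABody (pos1list pos2list : List Int) (binsize : Int)
    (result : PySem.Dict String (List Int)) (g : List Int) : PySem.Dict String (List Int) :=
  let ctx := pvACtx pos1list pos2list g
  let pos2group := pvGroup1 ctx.2.2
  if PySem.List.len pos2group > 1 then
    (PySem.List.pyRange 0 (PySem.List.len pos2group)).foldl
      (fun result j => pvAJBody ctx.1 ctx.2.1 binsize result
        (PySem.List.pyGetD pos2group j [])) result
  else
    (((result.modify "pos1_start" [] (fun x => x ++ [PySem.List.pyGetD g 0 0 * binsize])).modify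
        "pos1_end" [] (fun x => x ++ [PySem.List.pyGetD g (-1) 0 * binsize + binsize])).modify
        "pos2_start" [] (fun x => x ++
          [PySem.List.pyGetD (PySem.List.pyGetD pos2group 0 []) 0 0 * binsize])).modify
        "pos2_end" [] (fun x => x ++
          [PySem.List.pyGetD (PySem.List.pyGetD pos2group 0 []) (-1) 0 * binsize + binsize])

def group_position (pos1list : List Int) (pos2list : List Int) (binsize : Int) :
    List (String × List Int) :=
  let l1 := PySem.List.sorted (PySem.Set.ofList pos1list)
      (fun v => (PySem.List.index? pos1list v).getD 0)
  let pos1group := pvGroup1 l1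
  let result := (PySem.List.pyRange 0 (PySem.List.len pos1group)).foldl
    (fun result i => pvABody pos1list pos2list binsize result
      (PySem.List.pyGetD pos1group i [])) PySem.Dict.empty
  result.items

-- ===== PORT B =====
-- B's fused aggregation loop over the sorted distinct pos2 values: state
-- (recs, mn, mx, lo2, hi2), returning the record list and the final (lo2, hi2)
def pvAggLoop (m : PySem.Dict Int Int) (ks : List Int)
    (recs : List (Int × Int × Int × Int)) (mn mx lo2 hi2 : Int) :
    List (Int × Int × Int × Int) × Int × Int :=
  match ks with
  | [] => (recs ++ [(mn, mx, lo2, hi2)], lo2, hi2)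
  | v :: t =>
    let p := m.getD v 0          -- m[v]: v is a key of m, so no KeyError
    if v - hi2 == 1 then
      pvAggLoop m t recs (if p < mn then p else mn) (if mx < p then p else mx) lo2 v
    else
      pvAggLoop m t (recs ++ [(mn, mx, lo2, hi2)]) p p v v

-- the fused fold applied to the sorted key list (the started == False first element peeled)
def pvAggState (m : PySem.Dict Int Int) (ks : List Int) (lo hi : Int) :
    List (Int × Int × Int × Int) × Int × Int :=
  match ks with
  | [] => ([], lo, hi)        -- empty slice: Python raises NameError (excluded by Pre_)
  | v :: t => pvAggLoop m t [] (m.getD v 0) (m.getD v 0) v v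

-- the tail of flush: sorted keys, the fused fold, and the single-run replacement
def pvFlushAfter (m : PySem.Dict Int Int) (lo hi : Int) :
    List (Int × Int × Int × Int) :=
  let ks := PySem.List.sorted m.keys (fun x => x)
  let r := pvAggState m ks lo hi
  if r.1.length == 1 then [(lo, hi, r.2.1, r.2.2)] else r.1

-- the body of flush after the two slices (factored for readability)
def pvFlushCore (cur2 cur1 : List Int) (lo hi : Int) : List (Int × Int × Int × Int) :=
  pvFlushAfter ((cur2.zip cur1).foldl
    (fun (m : PySem.Dict Int Int) p =>
      if m.contains p.1 then m else m.insert p.1 p.2) PySem.Dict.empty) lo hi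

-- flush(lo, hi, s): one pos1 run and the start index of its slice
def pvFlush (pos1list pos2list : List Int) (last : PySem.Dict Int Int)
    (lo hi s : Int) : List (Int × Int × Int × Int) :=
  let e := last.getD hi 0        -- last[hi]: hi ∈ pos1list, so the key is present
  pvFlushCore (PySem.List.slice pos2list (some s) (some (e + 1)))
    (PySem.List.slice pos1list (some s) (some (e + 1))) lo hi

-- B's outer fused scan after the first processed element (started == True)
def pvScanLoop (pos1list pos2list : List Int) (last : PySem.Dict Int Int)
    (rest : List (Int × Int)) (recs : List (Int × Int × Int × Int))
    (seen : PySem.Set Int) (lo1 hi1 s1 : Int) : List (Int × Int × Int × Int) :=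
  match rest with
  | [] => recs ++ pvFlush pos1list pos2list last lo1 hi1 s1
  | (i, v) :: t =>
    if PySem.Set.contains seen v then
      pvScanLoop pos1list pos2list last t recs seen lo1 hi1 s1
    else
      let seen' := PySem.Set.add seen v
      if v - hi1 == 1 then
        pvScanLoop pos1list pos2list last t recs seen' lo1 v s1
      else
        pvScanLoop pos1list pos2list last t
          (recs ++ pvFlush pos1list pos2list last lo1 hi1 s1) seen' v v i

-- the started == False phase: the first pair initialises lo1/hi1/s1 (no flush);
-- on [] Python raises NameError at the final flush (excluded by Pre_)
def pvScanStart (pos1list pos2list : List Int) (last : PySem.Dict Int Int)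
    (pairs : List (Int × Int)) : List (Int × Int × Int × Int) :=
  match pairs with
  | [] => []
  | (i, v) :: t =>
      pvScanLoop pos1list pos2list last t [] (PySem.Set.add PySem.Set.empty v) v v i

-- the returned dict: four comprehensions over the collected records
def pvOut (recs : List (Int × Int × Int × Int)) (binsize : Int) : List (String × List Int) :=
  [("pos1_start", recs.map (fun q => q.1 * binsize)),
   ("pos1_end", recs.map (fun q => q.2.1 * binsize + binsize)),
   ("pos2_start", recs.map (fun q => q.2.2.1 * binsize)),
   ("pos2_end", recs.map (fun q => q.2.2.2 * binsize + binsize))]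

def group_position_alt (pos1list : List Int) (pos2list : List Int) (binsize : Int) :
    List (String × List Int) :=
  pvOut (pvScanStart pos1list pos2list
    ((PySem.List.enumerate pos1list).foldl
      (fun (d : PySem.Dict Int Int) p => d.insert p.2 p.1) PySem.Dict.empty)
    (PySem.List.enumerate pos1list)) binsize

-- ===== PRECONDITION & SPEC =====
-- Pre_ excludes empty pos1list (A raises IndexError there) and pos2list shorter than pos1list,
-- where A raises IndexError whenever some run's start index reaches past pos2list and returns
-- only on some layouts (B raises there too, see claim cites).
def Pre_group_position (pos1list : List Int) (pos2list : List Int) (binsize : Int) : Prop :=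
  pos1list ≠ [] ∧ pos1list.length ≤ pos2list.length

instance (pos1list : List Int) (pos2list : List Int) (binsize : Int) :
    Decidable (Pre_group_position pos1list pos2list binsize) := by
  unfold Pre_group_position; infer_instance

def pvWitness_group_position : List Int × List Int × Int := ([3, 4, 1], [5, 6, 9], 2)

def Spec_group_position (pos1list : List Int) (pos2list : List Int) (binsize : Int)
    (out : List (String × List Int)) : Prop := out = group_position_alt pos1list pos2list binsize
instance (pos1list : List Int) (pos2list : List Int) (binsize : Int) (out : List (String × List Int)) : Decidable (Spec_group_position pos1list pos2list binsize out) := by unfold Spec_group_position; infer_instance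

-- ===== CLAIM (what is proved, stated in full; the proofs are below) =====
def Claim_equal_group_position : Prop := ∀ (pos1list : List Int) (pos2list : List Int) (binsize : Int), Dom_group_position pos1list pos2list binsize → Pre_group_position pos1list pos2list binsize → Spec_group_position pos1list pos2list binsize (group_position pos1list pos2list binsize)

-- ===== LEMMAS AND PROOFS =====

-- the range list a run (lo, hi) denotes
def pvRangeF (r : Int × Int) : List Int := PySem.List.pyRange r.1 (r.2 + 1)

-- the four dict keys, and one record as key/value pairs
def pvKeys : List String := ["pos1_start", "pos1_end", "pos2_start", "pos2_end"]
def pvPairs (q : Int × Int × Int × Int) : List (String × Int) :=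
  [("pos1_start", q.1), ("pos1_end", q.2.1), ("pos2_start", q.2.2.1), ("pos2_end", q.2.2.2)]

-- first/last-occurrence dicts, named (B's 'last' dict is pvLast1)
def pvFirst1 (xs : List Int) : PySem.Dict Int Int :=
  List.foldl (fun d p => d.setdefault p.2 p.1) PySem.Dict.empty (PySem.List.enumerate xs)
def pvLast1 (xs : List Int) : PySem.Dict Int Int :=
  List.foldl (fun d p => d.insert p.2 p.1) PySem.Dict.empty (PySem.List.enumerate xs)

-- consecutive ascending runs of a value list as (lo, hi) pairs (proof-side reference shape)
def pvRunsLoop (rest : List Int) (res : List (Int × Int)) (lo prev : Int) : List (Int × Int) :=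
  match rest with
  | [] => res ++ [(lo, prev)]
  | v :: t =>
    if v - prev != 1 then pvRunsLoop t (res ++ [(lo, prev)]) v v
    else pvRunsLoop t res lo v

def pvRuns (data : List Int) : List (Int × Int) :=
  pvRunsLoop (PySem.List.slice data (some 1) none) []
    (PySem.List.pyGetD data 0 0) (PySem.List.pyGetD data 0 0)

-- the slice context of one pos1 run (proof-side, via the first/last dicts)
def pvBCtx (pos1list pos2list : List Int) (first1 last1 : PySem.Dict Int Int)
    (r : Int × Int) : List Int × List Int × List Int :=
  let s := first1.getD r.1 0
  let e := last1.getD r.2 0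
  let cur2 := PySem.List.slice pos2list (some s) (some (e + 1))
  let cur1 := PySem.List.slice pos1list (some s) (some (e + 1))
  (cur2, cur1, PySem.List.sorted (PySem.Set.ofList cur2) (fun x => x))

-- the per-run record list in scaled (already × binsize) form, over a context (cur2, cur1, l2)
def pvRecBCore (c2 c1 l2 : List Int) (binsize : Int) (r : Int × Int) :
    List (Int × Int × Int × Int) :=
  let runs2 := pvRuns l2
  if runs2.length > 1 then
    let m := (c2.zip c1).foldl (fun m p => m.setdefault p.1 p.2)
      (PySem.Dict.empty : PySem.Dict Int Int)
    runs2.map (fun r2 =>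
      ((PySem.List.min? ((PySem.List.pyRange r2.1 (r2.2 + 1)).map (fun v => m.getD v 0))
          (fun x => x)).getD 0 * binsize,
       (PySem.List.max? ((PySem.List.pyRange r2.1 (r2.2 + 1)).map (fun v => m.getD v 0))
          (fun x => x)).getD 0 * binsize + binsize,
       r2.1 * binsize, r2.2 * binsize + binsize))
  else
    [(r.1 * binsize, r.2 * binsize + binsize,
      (PySem.List.pyGetD (pvRuns l2) 0 (0, 0)).1 * binsize,
      (PySem.List.pyGetD (pvRuns l2) 0 (0, 0)).2 * binsize + binsize)]

def pvRecB (pos1list pos2list : List Int) (binsize : Int) (first1 last1 : PySem.Dict Int Int)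
    (r : Int × Int) : List (Int × Int × Int × Int) :=
  pvRecBCore (pvBCtx pos1list pos2list first1 last1 r).1
    (pvBCtx pos1list pos2list first1 last1 r).2.1
    (pvBCtx pos1list pos2list first1 last1 r).2.2 binsize r

-- the record one iteration of A's j-loop emits
def pvAJRec (cur_pos2_list cur_pos1_list : List Int) (binsize : Int) (grp : List Int) :
    Int × Int × Int × Int :=
  let np0 := grp.foldl (pvAKBody cur_pos2_list cur_pos1_list) []
  (PySem.List.pyGetD (PySem.List.sorted np0 (fun x => x)) 0 0 * binsize,
   PySem.List.pyGetD (PySem.List.sorted np0 (fun x => x)) (-1) 0 * binsize + binsize,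
   PySem.List.pyGetD grp 0 0 * binsize,
   PySem.List.pyGetD grp (-1) 0 * binsize + binsize)

-- A's per-run record list, over a context (cur2, cur1, l2)
def pvRecACore (c2 c1 l2 : List Int) (binsize : Int) (g : List Int) :
    List (Int × Int × Int × Int) :=
  let pos2group := pvGroup1 l2
  if PySem.List.len pos2group > 1 then
    pos2group.map (pvAJRec c2 c1 binsize)
  else
    [(PySem.List.pyGetD g 0 0 * binsize,
      PySem.List.pyGetD g (-1) 0 * binsize + binsize,
      PySem.List.pyGetD (PySem.List.pyGetD pos2group 0 []) 0 0 * binsize,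
      PySem.List.pyGetD (PySem.List.pyGetD pos2group 0 []) (-1) 0 * binsize + binsize)]

def pvRecA (pos1list pos2list : List Int) (binsize : Int) (g : List Int) :
    List (Int × Int × Int × Int) :=
  pvRecACore (pvACtx pos1list pos2list g).1 (pvACtx pos1list pos2list g).2.1
    (pvACtx pos1list pos2list g).2.2 binsize g

-- B-side abstractions: the scaling map, one aggregated record per pos2 run, the
-- first-occurrence subsequence of an index/value list, the seen-free scan, the
-- indexed runs loop, and the final run state
def pvScale (binsize : Int) (q : Int × Int × Int × Int) : Int × Int × Int × Int :=
  (q.1 * binsize, q.2.1 * binsize + binsize, q.2.2.1 * binsize, q.2.2.2 * binsize + binsize)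

def pvG (m : PySem.Dict Int Int) (r2 : Int × Int) : Int × Int × Int × Int :=
  ((PySem.List.min? ((PySem.List.pyRange r2.1 (r2.2 + 1)).map (fun v => m.getD v 0))
      (fun x => x)).getD 0,
   (PySem.List.max? ((PySem.List.pyRange r2.1 (r2.2 + 1)).map (fun v => m.getD v 0))
      (fun x => x)).getD 0,
   r2.1, r2.2)

def pvFirstOccs (S : PySem.Set Int) : List (Int × Int) → List (Int × Int)
  | [] => []
  | (i, v) :: t =>
    if PySem.Set.contains S v then pvFirstOccs S t
    else (i, v) :: pvFirstOccs (PySem.Set.add S v) t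

def pvScanNS (pos1list pos2list : List Int) (last : PySem.Dict Int Int)
    (rest : List (Int × Int)) (recs : List (Int × Int × Int × Int))
    (lo1 hi1 s1 : Int) : List (Int × Int × Int × Int) :=
  match rest with
  | [] => recs ++ pvFlush pos1list pos2list last lo1 hi1 s1
  | (i, v) :: t =>
    if v - hi1 == 1 then pvScanNS pos1list pos2list last t recs lo1 v s1
    else pvScanNS pos1list pos2list last t
      (recs ++ pvFlush pos1list pos2list last lo1 hi1 s1) v v i

def pvRunsLoopI (rest : List (Int × Int)) (res : List (Int × Int × Int))
    (lo prev s : Int) : List (Int × Int × Int) :=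
  match rest with
  | [] => res ++ [(lo, prev, s)]
  | (i, v) :: t =>
    if v - prev == 1 then pvRunsLoopI t res lo v s
    else pvRunsLoopI t (res ++ [(lo, prev, s)]) v v i

def pvLastRun : List Int → Int → Int → Int × Int
  | [], lo, prev => (lo, prev)
  | v :: t, lo, prev =>
    if v - prev == 1 then pvLastRun t lo v else pvLastRun t v v

-- tiny Option/Dict bridges (definitional)
lemma pv_some_or {α : Type} (a : α) (o : Option α) : (Option.or (some a) o) = some a := rfl
lemma pv_none_or {α : Type} (o : Option α) : (Option.or none o) = o := by cases o <;> rfl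
lemma pv_getD_eq {κ ν : Type} [BEq κ] (d : PySem.Dict κ ν) (k : κ) (dflt : ν) :
    d.getD k dflt = (d.get? k).getD dflt := rfl
lemma pv_contains_of_mem (l : List Int) (a : Int) (h : a ∈ l) : l.contains a = true := by
  simpa using h
lemma pv_dedup_ne_nil (xs : List Int) (h : xs ≠ []) : PySem.List.dedup xs ≠ [] := by
  obtain ⟨x, t, rfl⟩ := List.exists_cons_of_ne_nil h
  intro hnil
  have hx : x ∈ PySem.List.dedup (x :: t) :=
    (PySem.List.mem_dedup _ _).mpr (List.mem_cons_self ..)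
  rw [hnil] at hx
  simp at hx

-- ---- pvRuns facts ----
lemma pvRunsLoop_ne_nil (rest : List Int) : ∀ (res : List (Int × Int)) (lo prev : Int),
    pvRunsLoop rest res lo prev ≠ [] := by
  induction rest with
  | nil => intro res lo prev; simp [pvRunsLoop]
  | cons v t ih =>
    intro res lo prev
    simp only [pvRunsLoop]
    split
    · exact ih _ _ _
    · exact ih _ _ _

lemma pvRunsLoop_acc (rest : List Int) : ∀ (a b : List (Int × Int)) (lo prev : Int),
    pvRunsLoop rest (a ++ b) lo prev = a ++ pvRunsLoop rest b lo prev := by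
  induction rest with
  | nil => intro a b lo prev; simp [pvRunsLoop]
  | cons v t ih =>
    intro a b lo prev
    simp only [pvRunsLoop]
    split
    · rw [List.append_assoc, ih]
    · exact ih _ _ _ _

lemma pvRunsLoop_getLastD (rest : List Int) : ∀ (res : List (Int × Int)) (lo prev : Int),
    (pvRunsLoop rest res lo prev).getLastD (0, 0) = pvLastRun rest lo prev := by
  induction rest with
  | nil =>
    intro res lo prev
    simp [pvRunsLoop, pvLastRun]
  | cons v t ih =>
    intro res lo prev
    simp only [pvRunsLoop, pvLastRun]
    by_cases hc : (v - prev == 1) = true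
    · rw [if_neg (by simp [beq_iff_eq.mp hc]), if_pos hc]
      exact ih _ _ _
    · rw [if_pos (by simpa using hc), if_neg hc]
      exact ih _ _ _

def pvRunOK (d : List Int) (r : Int × Int) : Prop :=
  r.1 ≤ r.2 ∧ (∃ i j : Nat, i ≤ j ∧ j < d.length ∧ d[i]? = some r.1 ∧ d[j]? = some r.2) ∧
  ∀ v : Int, r.1 ≤ v → v ≤ r.2 → v ∈ d

lemma pvRunsLoop_ok' (d : List Int) (rest : List Int) :
    ∀ (res : List (Int × Int)) (lo prev : Int) (i j : Nat),
      i ≤ j → j < d.length → d[i]? = some lo → d[j]? = some prev →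
      rest = d.drop (j + 1) → lo ≤ prev → (∀ v : Int, lo ≤ v → v ≤ prev → v ∈ d) →
      (∀ r ∈ res, pvRunOK d r) →
      ∀ r ∈ pvRunsLoop rest res lo prev, pvRunOK d r := by
  induction rest with
  | nil =>
    intro res lo prev i j hij hj hdi hdj hrest hlp hdense hres r hr
    simp only [pvRunsLoop] at hr
    rcases List.mem_append.mp hr with h | h
    · exact hres r h
    · simp only [List.mem_singleton] at h
      subst h
      exact ⟨hlp, ⟨i, j, hij, hj, hdi, hdj⟩, hdense⟩
  | cons v t ih =>
    intro res lo prev i j hij hj hdi hdj hrest hlp hdense hres r hr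
    have hv : d[j + 1]? = some v := by
      have h0 : (d.drop (j + 1))[0]? = some v := by rw [← hrest]; rfl
      rw [List.getElem?_drop] at h0
      simpa using h0
    have hj1 : j + 1 < d.length := by
      rcases List.getElem?_eq_some_iff.mp hv with ⟨h, _⟩
      exact h
    have ht : t = d.drop (j + 2) := by
      have h0 : (d.drop (j + 1)).tail = d.drop (j + 1 + 1) := List.tail_drop
      rw [← hrest] at h0
      simpa using h0
    simp only [pvRunsLoop] at hr
    by_cases hc : (v - prev != 1) = true
    · rw [if_pos hc] at hr
      refine ih _ _ _ (j + 1) (j + 1) le_rfl hj1 hv hv ht le_rfl ?_ ?_ r hr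
      · intro w h1 h2
        have : w = v := le_antisymm h2 h1
        subst this
        exact List.mem_of_getElem? hv
      · intro r' hr'
        rcases List.mem_append.mp hr' with h | h
        · exact hres r' h
        · simp only [List.mem_singleton] at h
          subst h
          exact ⟨hlp, ⟨i, j, hij, hj, hdi, hdj⟩, hdense⟩
    · rw [if_neg hc] at hr
      have hv1 : v = prev + 1 := by
        simp only [bne_iff_ne, ne_eq, not_not] at hc
        omega
      refine ih _ _ _ i (j + 1) (by omega) hj1 hdi hv ht (by omega) ?_ hres r hr
      intro w h1 h2
      by_cases hw : w ≤ prev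
      · exact hdense w h1 hw
      · have : w = v := by omega
        subst this
        exact List.mem_of_getElem? hv

lemma pvRuns_ok (d : List Int) (hd : d ≠ []) : ∀ r ∈ pvRuns d, pvRunOK d r := by
  obtain ⟨x, t, rfl⟩ := List.exists_cons_of_ne_nil hd
  intro r hr
  unfold pvRuns at hr
  rw [PySem.List.slice_from_one] at hr
  refine pvRunsLoop_ok' (x :: t) (x :: t).tail [] _ _ 0 0 le_rfl (by simp) ?_ ?_ rfl le_rfl ?_
    (by simp) r hr
  · simp [PySem.List.pyGetD_zero_cons]
  · simp [PySem.List.pyGetD_zero_cons]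
  · intro v h1 h2
    have hx : PySem.List.pyGetD (x :: t) 0 0 = x := PySem.List.pyGetD_zero_cons x t 0
    rw [hx] at h1 h2
    have : v = x := le_antisymm h2 h1
    subst this
    exact List.mem_cons_self ..

lemma pvRuns_ne_nil (d : List Int) : pvRuns d ≠ [] := by
  unfold pvRuns
  exact pvRunsLoop_ne_nil _ _ _ _

-- ---- group_1 = runs ----
lemma pvG1Loop_eq (d : List Int) (rest : List Int) :
    ∀ (acc : List (List Int)) (accR : List (Int × Int)) (lo last : Int) (sn en : Nat),
      acc = accR.map pvRangeF → sn ≤ en → en < d.length →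
      d[sn]? = some lo → d[en]? = some last → rest = d.drop (en + 1) →
      pvG1Loop d rest last (sn : Int) (en : Int) acc
        = (pvRunsLoop rest accR lo last).map pvRangeF := by
  induction rest with
  | nil =>
    intro acc accR lo last sn en hacc hsn hen hdsn hden hrest
    have h1 : PySem.List.pyGetD d (sn : Int) 0 = lo := by
      rw [PySem.List.pyGetD_natCast, List.getD_eq_getElem?_getD, hdsn]; rfl
    have h2 : PySem.List.pyGetD d (en : Int) 0 = last := by
      rw [PySem.List.pyGetD_natCast, List.getD_eq_getElem?_getD, hden]; rfl
    simp only [pvG1Loop, pvRunsLoop, hacc, List.map_append, h1, h2]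
    rfl
  | cons n t ih =>
    intro acc accR lo last sn en hacc hsn hen hdsn hden hrest
    have hv : d[en + 1]? = some n := by
      have h0 : (d.drop (en + 1))[0]? = some n := by rw [← hrest]; rfl
      rw [List.getElem?_drop] at h0
      simpa using h0
    have hj1 : en + 1 < d.length := by
      rcases List.getElem?_eq_some_iff.mp hv with ⟨h, _⟩
      exact h
    have ht : t = d.drop (en + 2) := by
      have h0 : (d.drop (en + 1)).tail = d.drop (en + 1 + 1) := List.tail_drop
      rw [← hrest] at h0
      simpa using h0
    have h1 : PySem.List.pyGetD d (sn : Int) 0 = lo := by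
      rw [PySem.List.pyGetD_natCast, List.getD_eq_getElem?_getD, hdsn]; rfl
    have h2 : PySem.List.pyGetD d (en : Int) 0 = last := by
      rw [PySem.List.pyGetD_natCast, List.getD_eq_getElem?_getD, hden]; rfl
    have hcast : ((en : Int) + 1) = ((en + 1 : Nat) : Int) := by push_cast; ring
    simp only [pvG1Loop, pvRunsLoop]
    by_cases hc : n - last = 1
    · rw [if_pos (by simpa using hc), if_neg (by simp [hc])]
      rw [hcast]
      exact ih acc accR lo n sn (en + 1) hacc (by omega) hj1 hdsn hv ht
    · rw [if_neg (by simpa using hc), if_pos (by simpa using hc)]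
      rw [hcast]
      refine ih _ _ n n (en + 1) (en + 1) ?_ le_rfl hj1 hv hv ht
      rw [hacc, List.map_append]
      simp [pvRangeF, h1, h2]

lemma pvGroup1_eq (d : List Int) (hd : d ≠ []) :
    pvGroup1 d = (pvRuns d).map pvRangeF := by
  obtain ⟨x, t, rfl⟩ := List.exists_cons_of_ne_nil hd
  unfold pvGroup1 pvRuns
  rw [PySem.List.slice_from_one]
  have h0 : PySem.List.pyGetD (x :: t) 0 0 = x := PySem.List.pyGetD_zero_cons x t 0
  have := pvG1Loop_eq (x :: t) (x :: t).tail [] [] x x 0 0 rfl le_rfl (by simp)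
    (by simp) (by simp) rfl
  simpa [h0] using this

-- ---- endpoints of a range list ----
lemma pvRangeF_head (r : Int × Int) (h : r.1 ≤ r.2) :
    PySem.List.pyGetD (pvRangeF r) 0 0 = r.1 := by
  unfold pvRangeF
  rw [PySem.List.pyRange_one_cons (by omega)]
  exact PySem.List.pyGetD_zero_cons _ _ _

lemma pvRangeF_last (r : Int × Int) (h : r.1 ≤ r.2) :
    PySem.List.pyGetD (pvRangeF r) (-1) 0 = r.2 := by
  unfold pvRangeF
  rw [PySem.List.pyRange_one_succ_right h]
  exact PySem.List.pyGetD_neg_one_append_singleton _ _ _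

lemma pvRangeF_ne_nil (r : Int × Int) (h : r.1 ≤ r.2) : pvRangeF r ≠ [] := by
  unfold pvRangeF
  rw [PySem.List.pyRange_one_cons (by omega)]
  simp

-- ---- dedup / sorted-by-first-index ----
lemma pv_pairwise_idx_ofList (xs : List Int) :
    (PySem.Set.ofList xs).Pairwise
      (fun a b => (PySem.List.index? xs a).getD 0 < (PySem.List.index? xs b).getD 0) := by
  induction xs using List.reverseRecOn with
  | nil => simp [PySem.Set.ofList_nil]
  | append_singleton ys y ih =>
    rw [PySem.Set.ofList_append_singleton]
    by_cases hy : y ∈ PySem.Set.ofList ys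
    · rw [PySem.Set.add_of_mem hy]
      refine List.Pairwise.imp_of_mem ?_ ih
      intro a b ha hb hab
      have ha' : a ∈ ys := (PySem.Set.mem_ofList ys a).mp ha
      have hb' : b ∈ ys := (PySem.Set.mem_ofList ys b).mp hb
      rwa [PySem.List.index?_append_of_mem [y] ha', PySem.List.index?_append_of_mem [y] hb']
    · rw [PySem.Set.add_of_not_mem hy]
      rw [List.pairwise_append]
      refine ⟨?_, List.pairwise_singleton _ _, ?_⟩
      · refine List.Pairwise.imp_of_mem ?_ ih
        intro a b ha hb hab
        have ha' : a ∈ ys := (PySem.Set.mem_ofList ys a).mp ha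
        have hb' : b ∈ ys := (PySem.Set.mem_ofList ys b).mp hb
        rwa [PySem.List.index?_append_of_mem [y] ha', PySem.List.index?_append_of_mem [y] hb']
      · intro a ha b hb
        simp only [List.mem_singleton] at hb
        have ha' : a ∈ ys := (PySem.Set.mem_ofList ys a).mp ha
        have hy' : y ∉ ys := fun h => hy ((PySem.Set.mem_ofList ys y).mpr h)
        rw [hb, PySem.List.index?_append_of_mem [y] ha',
          PySem.List.index?_append_singleton_self ys y hy']
        obtain ⟨k, hk⟩ := Option.isSome_iff_exists.mp
          ((PySem.List.index?_isSome_iff ys a).mpr ha')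
        obtain ⟨hklt, _, _⟩ := PySem.List.getElem_of_index?_eq_some hk
        rw [hk]
        simp only [Option.getD_some]
        omega

lemma pv_sorted_idx_ofList (xs : List Int) :
    PySem.List.sorted (PySem.Set.ofList xs) (fun v => (PySem.List.index? xs v).getD 0)
      = PySem.Set.ofList xs :=
  PySem.List.sorted_eq_of_perm_of_pairwise_lt _ _ _ (List.Perm.refl _) (pv_pairwise_idx_ofList xs)

lemma pv_ofList_sublist (xs : List Int) : List.Sublist (PySem.Set.ofList xs) xs := by
  induction xs using List.reverseRecOn with
  | nil => simp [PySem.Set.ofList_nil]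
  | append_singleton ys y ih =>
    rw [PySem.Set.ofList_append_singleton]
    by_cases hy : y ∈ PySem.Set.ofList ys
    · rw [PySem.Set.add_of_mem hy]
      exact ih.trans (List.sublist_append_left ys [y])
    · rw [PySem.Set.add_of_not_mem hy]
      exact List.Sublist.append ih (List.Sublist.refl [y])

lemma pv_ofList_sorted_eq (xs : List Int) :
    PySem.Set.ofList (PySem.List.sorted xs (fun x => x))
      = PySem.List.sorted (PySem.Set.ofList xs) (fun x => x) := by
  refine (PySem.List.sorted_eq_of_perm_of_pairwise_lt _ _ _ ?_ ?_).symm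
  · rw [List.perm_ext_iff_of_nodup (PySem.Set.nodup_ofList _) (PySem.Set.nodup_ofList _)]
    intro a
    rw [PySem.Set.mem_ofList, PySem.Set.mem_ofList, PySem.List.mem_sorted]
  · have hsub := pv_ofList_sublist (PySem.List.sorted xs (fun x => x))
    have hle : (PySem.Set.ofList (PySem.List.sorted xs (fun x => x))).Pairwise
        (fun a b : Int => a ≤ b) :=
      (PySem.List.sorted_pairwise xs (fun x => x)).sublist hsub
    have hne : (PySem.Set.ofList (PySem.List.sorted xs (fun x => x))).Pairwise
        (fun a b : Int => a ≠ b) := PySem.Set.nodup_ofList _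
    exact (hle.and hne).imp (fun h => lt_of_le_of_ne h.1 h.2)

lemma pv_l2_eq (c2 : List Int) :
    PySem.List.sorted (PySem.Set.ofList (PySem.List.sorted c2 (fun x => x)))
      (fun v => (PySem.List.index? (PySem.List.sorted c2 (fun x => x)) v).getD 0)
      = PySem.List.sorted (PySem.Set.ofList c2) (fun x => x) := by
  rw [pv_sorted_idx_ofList, pv_ofList_sorted_eq]

-- ---- dict lookups ----
lemma pv_first1_get? (xs : List Int) : ∀ (s : Int) (d : PySem.Dict Int Int) (v : Int),
    (List.foldl (fun d (p : Int × Int) => d.setdefault p.2 p.1) d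
        (PySem.List.enumerate xs s)).get? v
      = (d.get? v).or ((PySem.List.index? xs v).map (fun k => s + (k : Int))) := by
  induction xs with
  | nil =>
    intro s d v
    have hnone : PySem.List.index? ([] : List Int) v = none :=
      (PySem.List.index?_eq_none_iff _ _).mpr (by simp)
    simp [PySem.List.enumerate, hnone]
  | cons x t ih =>
    intro s d v
    rw [PySem.List.enumerate_cons, List.foldl_cons, ih]
    by_cases hvx : v = x
    · subst hvx
      rw [PySem.Dict.get?_setdefault_self, PySem.List.index?_cons_self]
      cases hdx : d.get? v <;> simp [hdx]
    · rw [PySem.Dict.get?_setdefault_of_ne _ _ hvx,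
        PySem.List.index?_cons_of_ne t (fun h => hvx h.symm)]
      cases hit : PySem.List.index? t v with
      | none => simp [hit]
      | some kv =>
        cases hdv : d.get? v <;> simp [hdv, hit] <;> omega

lemma pv_first1_getD (xs : List Int) (v : Int) (hv : v ∈ xs) :
    (pvFirst1 xs).getD v 0 = ((PySem.List.index? xs v).getD 0 : Nat) := by
  obtain ⟨k, hk⟩ := Option.isSome_iff_exists.mp ((PySem.List.index?_isSome_iff xs v).mpr hv)
  have h := pv_first1_get? xs 0 PySem.Dict.empty v
  have hgd : (PySem.Dict.empty : PySem.Dict Int Int).get? v = none := rfl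
  rw [hgd] at h
  show ((List.foldl (fun d (p : Int × Int) => d.setdefault p.2 p.1) PySem.Dict.empty
      (PySem.List.enumerate xs 0)).get? v).getD 0 = _
  rw [h, hk]
  simp

lemma pv_last1_get? (xs : List Int) (s : Int) (d : PySem.Dict Int Int) (v : Int) :
    (List.foldl (fun d (p : Int × Int) => d.insert p.2 p.1) d
        (PySem.List.enumerate xs s)).get? v
      = ((PySem.List.index? xs.reverse v).map
          (fun k => s + ((xs.length - 1 - k : Nat) : Int))).or (d.get? v) := by
  induction xs using List.reverseRecOn with
  | nil =>
    have hnone : PySem.List.index? ([] : List Int).reverse v = none :=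
      (PySem.List.index?_eq_none_iff _ _).mpr (by simp)
    simp [PySem.List.enumerate, hnone]
  | append_singleton ys y ih =>
    rw [PySem.List.enumerate_append, List.foldl_append]
    have he : PySem.List.enumerate [y] (s + (ys.length : Int)) = [(s + (ys.length : Int), y)] := rfl
    rw [he]
    simp only [List.foldl_cons, List.foldl_nil]
    rw [List.reverse_append]
    simp only [List.reverse_singleton, List.singleton_append]
    by_cases hvy : v = y
    · subst hvy
      rw [PySem.Dict.get?_insert_self, PySem.List.index?_cons_self]
      simp
    · rw [PySem.Dict.get?_insert_of_ne _ _ hvy,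
        PySem.List.index?_cons_of_ne ys.reverse (fun h => hvy h.symm), ih]
      cases hit : PySem.List.index? ys.reverse v with
      | none => simp [hit]
      | some kv =>
        simp only [hit, Option.map_some]
        have hval : (ys.length - 1 - kv : Nat) = ((ys ++ [y]).length - 1 - (kv + 1) : Nat) := by
          simp; omega
        rw [hval]

lemma pv_last1_getD (xs : List Int) (v : Int) (hv : v ∈ xs) :
    (pvLast1 xs).getD v 0
      = PySem.List.len xs - 1 - ((PySem.List.index? xs.reverse v).getD 0 : Nat) := by
  have hvr : v ∈ xs.reverse := by simpa using hv
  obtain ⟨k, hk⟩ := Option.isSome_iff_exists.mp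
    ((PySem.List.index?_isSome_iff xs.reverse v).mpr hvr)
  obtain ⟨hklt, _, _⟩ := PySem.List.getElem_of_index?_eq_some hk
  rw [List.length_reverse] at hklt
  have h := pv_last1_get? xs 0 PySem.Dict.empty v
  show ((List.foldl (fun d (p : Int × Int) => d.insert p.2 p.1) PySem.Dict.empty
      (PySem.List.enumerate xs 0)).get? v).getD 0 = _
  rw [h, hk]
  simp only [Option.map_some, pv_some_or, Option.getD_some, PySem.List.len_eq]
  omega

lemma pv_zipm_get? (u : List Int) : ∀ (w : List Int) (d : PySem.Dict Int Int) (v : Int),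
    u.length ≤ w.length →
    ((u.zip w).foldl (fun d p => d.setdefault p.1 p.2) d).get? v
      = (d.get? v).or ((PySem.List.index? u v).bind (fun k => w[k]?)) := by
  induction u with
  | nil =>
    intro w d v _
    have hnone : PySem.List.index? ([] : List Int) v = none :=
      (PySem.List.index?_eq_none_iff _ _).mpr (by simp)
    simp [hnone]
  | cons x u' ih =>
    intro w d v hlen
    cases w with
    | nil => simp at hlen
    | cons y w' =>
      simp only [List.zip_cons_cons, List.foldl_cons]
      rw [ih w' _ v (by simpa using hlen)]
      by_cases hvx : v = x
      · subst hvx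
        rw [PySem.Dict.get?_setdefault_self, PySem.List.index?_cons_self]
        cases hdx : d.get? v <;> simp [hdx]
      · rw [PySem.Dict.get?_setdefault_of_ne _ _ hvx,
          PySem.List.index?_cons_of_ne u' (fun h => hvx h.symm)]
        cases hit : PySem.List.index? u' v <;> simp [hit]

-- ---- sorted head/last vs min/max ----
lemma pv_sorted_head_min (xs : List Int) (h : xs ≠ []) :
    PySem.List.pyGetD (PySem.List.sorted xs (fun x => x)) 0 0
      = (PySem.List.min? xs (fun x => x)).getD 0 := by
  have hs : PySem.List.sorted xs (fun x => x) ≠ [] := by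
    rw [Ne, PySem.List.sorted_eq_nil_iff]; exact h
  obtain ⟨m, t, hm⟩ := List.exists_cons_of_ne_nil hs
  obtain ⟨mn, hmn⟩ : ∃ mn, PySem.List.min? xs (fun x => x) = some mn := by
    cases hx : PySem.List.min? xs (fun x => x)
    · exact absurd ((PySem.List.min?_eq_none_iff xs _).mp hx) h
    · exact ⟨_, rfl⟩
  rw [hm, PySem.List.pyGetD_zero_cons, hmn, Option.getD_some]
  apply le_antisymm
  · exact PySem.List.key_head_sorted_le xs _ hm mn (PySem.List.min?_mem hmn)
  · refine PySem.List.min?_isMin hmn m ?_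
    have hmem : m ∈ PySem.List.sorted xs (fun x => x) := by
      rw [hm]; exact List.mem_cons_self ..
    exact (PySem.List.mem_sorted xs _ false m).mp hmem

lemma pv_sorted_last_max (xs : List Int) (h : xs ≠ []) :
    PySem.List.pyGetD (PySem.List.sorted xs (fun x => x)) (-1) 0
      = (PySem.List.max? xs (fun x => x)).getD 0 := by
  have hs : PySem.List.sorted xs (fun x => x) ≠ [] := by
    rw [Ne, PySem.List.sorted_eq_nil_iff]; exact h
  obtain ⟨mx, hmx⟩ : ∃ mx, PySem.List.max? xs (fun x => x) = some mx := by
    cases hx : PySem.List.max? xs (fun x => x)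
    · exact absurd ((PySem.List.max?_eq_none_iff xs _).mp hx) h
    · exact ⟨_, rfl⟩
  rw [PySem.List.pyGetD_neg_one _ _ hs, hmx, Option.getD_some]
  apply le_antisymm
  · refine PySem.List.max?_isMax hmx _ ?_
    exact (PySem.List.mem_sorted xs _ false _).mp (List.getLast_mem hs)
  · have hmem : mx ∈ PySem.List.sorted xs (fun x => x) :=
      (PySem.List.mem_sorted xs _ false mx).mpr (PySem.List.max?_mem hmx)
    obtain ⟨p, hp, hpv⟩ := List.mem_iff_getElem.mp hmem
    rw [List.getLast_eq_getElem hs, ← hpv]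
    exact PySem.List.key_sorted_getElem_mono xs (fun x => x) (by omega) (by omega)

-- ---- first index ≤ any index holding the value ----
lemma pv_firstIdx_le (xs : List Int) (v : Int) (k : Nat) (hk : k < xs.length)
    (hv : xs[k] = v) : (PySem.List.index? xs v).getD 0 ≤ k := by
  have hvmem : v ∈ xs := hv ▸ List.getElem_mem hk
  obtain ⟨k0, hk0⟩ := Option.isSome_iff_exists.mp ((PySem.List.index?_isSome_iff xs v).mpr hvmem)
  obtain ⟨hlt, hval, hmin⟩ := PySem.List.getElem_of_index?_eq_some hk0
  rw [hk0, Option.getD_some]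
  by_contra hgt
  push_neg at hgt
  exact hmin k hgt hv

-- ---- fold shapes ----
lemma pv_foldl_flatMap {α β γ : Type} (l : List α) (g : α → List β) (f : γ → β → γ) :
    ∀ (init : γ),
    l.foldl (fun acc r => (g r).foldl f acc) init = (l.flatMap g).foldl f init := by
  induction l with
  | nil => intro init; simp
  | cons x t ih =>
    intro init
    simp only [List.foldl_cons, List.flatMap_cons, List.foldl_append]
    exact ih _

lemma pv_flatMap_congr {α β : Type} (l : List α) (f g : α → List β)
    (h : ∀ x ∈ l, f x = g x) : l.flatMap f = l.flatMap g := by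
  induction l with
  | nil => rfl
  | cons x t ih =>
    simp only [List.flatMap_cons]
    rw [h x (List.mem_cons_self ..), ih (fun y hy => h y (List.mem_cons_of_mem _ hy))]

lemma pv_flatMap_filter {α β : Type} (l : List α) (g : α → List β) (p : β → Bool) :
    (l.flatMap g).filter p = l.flatMap (fun x => (g x).filter p) := by
  induction l with
  | nil => rfl
  | cons x t ih => simp [List.filter_append, ih]

lemma pv_flatMap_single_map {α β γ : Type} (l : List α) (k : γ) (f : α → β) :
    (l.flatMap (fun q => [(k, f q)])).map (fun x => x.2) = l.map f := by
  induction l with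
  | nil => rfl
  | cons x t ih => simp [ih]

-- ---- the dict assembly of A ----
set_option maxHeartbeats 600000 in
lemma pv_dict_items (recs : List (Int × Int × Int × Int)) (h : recs ≠ []) :
    (recs.foldl (fun d q => (pvPairs q).foldl
        (fun (d : PySem.Dict String (List Int)) p => d.modify p.1 [] (fun x => x ++ [p.2])) d)
      PySem.Dict.empty).items
      = [("pos1_start", recs.map (·.1)), ("pos1_end", recs.map (·.2.1)),
         ("pos2_start", recs.map (·.2.2.1)), ("pos2_end", recs.map (·.2.2.2))] := by
  rw [pv_foldl_flatMap]
  have hkeys : (List.foldl (fun (d : PySem.Dict String (List Int)) p =>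
      d.modify p.1 [] (fun x => x ++ [p.2])) PySem.Dict.empty (recs.flatMap pvPairs)).keys
      = pvKeys := by
    have h1 := PySem.Dict.keys_foldl_modify_key (recs.flatMap pvPairs) Prod.fst
      ([] : List Int) (fun _ p => fun x => x ++ [p.2]) PySem.Dict.empty
    have h2 : (List.foldl (fun (d : PySem.Dict String (List Int)) p =>
        d.modify p.1 [] (fun x => x ++ [p.2])) PySem.Dict.empty (recs.flatMap pvPairs)).keys
        = PySem.Set.update ((PySem.Dict.empty : PySem.Dict String (List Int)).keys)
            ((recs.flatMap pvPairs).map Prod.fst) := h1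
    rw [h2]
    have hmap : (recs.flatMap pvPairs).map Prod.fst = recs.flatMap (fun _ => pvKeys) := by
      rw [List.map_flatMap]
      exact pv_flatMap_congr _ _ _ (fun q _ => by simp [pvPairs, pvKeys])
    rw [hmap]
    obtain ⟨q0, rest, rfl⟩ := List.exists_cons_of_ne_nil h
    rw [List.flatMap_cons]
    rw [show PySem.Set.update ((PySem.Dict.empty : PySem.Dict String (List Int)).keys)
        (pvKeys ++ rest.flatMap (fun _ => pvKeys))
        = PySem.Set.ofList (pvKeys ++ rest.flatMap (fun _ => pvKeys)) from
      PySem.Set.update_empty _]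
    rw [PySem.Set.ofList_append, PySem.Set.ofList_eq_self_of_nodup pvKeys (by decide),
      PySem.Set.update_eq_append_filter]
    have hfil : List.filter (fun y => !PySem.Set.contains pvKeys y)
        (PySem.Set.ofList (rest.flatMap (fun _ => pvKeys))) = [] := by
      rw [List.filter_eq_nil_iff]
      intro a ha
      have ha' : a ∈ rest.flatMap (fun _ => pvKeys) := (PySem.Set.mem_ofList _ _).mp ha
      have haK : a ∈ pvKeys := by
        rcases List.mem_flatMap.mp ha' with ⟨x, _, hx⟩
        exact hx
      simpa using haK
    rw [hfil, List.append_nil]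
  have hnodup : (List.foldl (fun (d : PySem.Dict String (List Int)) p =>
      d.modify p.1 [] (fun x => x ++ [p.2])) PySem.Dict.empty (recs.flatMap pvPairs)).keys.Nodup := by
    rw [hkeys]; decide
  rw [PySem.Dict.items_eq_map_keys _ hnodup ([] : List Int), hkeys]
  have hget : ∀ key : String,
      (List.foldl (fun (d : PySem.Dict String (List Int)) p =>
        d.modify p.1 [] (fun x => x ++ [p.2])) PySem.Dict.empty (recs.flatMap pvPairs)).getD key []
      = ((recs.flatMap pvPairs).filter (fun p => p.1 == key)).map (fun x => x.2) := by
    intro key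
    have := PySem.Dict.getD_foldl_modify_append (recs.flatMap pvPairs) PySem.Dict.empty key
    simpa using this
  have hcomp : ∀ (key : String) (proj : Int × Int × Int × Int → Int),
      (∀ q, (pvPairs q).filter (fun p => p.1 == key) = [(key, proj q)]) →
      ((recs.flatMap pvPairs).filter (fun p => p.1 == key)).map (fun x => x.2) = recs.map proj := by
    intro key proj hq
    rw [pv_flatMap_filter, pv_flatMap_congr _ _ _ (fun q _ => hq q)]
    exact pv_flatMap_single_map recs key proj
  simp only [pvKeys, List.map_cons, List.map_nil]
  rw [hget "pos1_start", hget "pos1_end", hget "pos2_start", hget "pos2_end"]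
  rw [hcomp "pos1_start" (·.1) (fun q => by simp [pvPairs]),
    hcomp "pos1_end" (·.2.1) (fun q => by simp [pvPairs]),
    hcomp "pos2_start" (·.2.2.1) (fun q => by simp [pvPairs]),
    hcomp "pos2_end" (·.2.2.2) (fun q => by simp [pvPairs])]

-- ---- A's loops as list folds ----
lemma pv_ifold_eq (pos1list pos2list : List Int) (binsize : Int) (pos1group : List (List Int)) :
    (PySem.List.pyRange 0 (PySem.List.len pos1group)).foldl
      (fun result i => pvABody pos1list pos2list binsize result
        (PySem.List.pyGetD pos1group i [])) PySem.Dict.empty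
    = pos1group.foldl (pvABody pos1list pos2list binsize) PySem.Dict.empty := by
  simpa using PySem.List.foldl_pyRange_pyGetD pos1group []
    (pvABody pos1list pos2list binsize) PySem.Dict.empty (le_refl 0)

lemma pv_jfold_eq (cur2 cur1 : List Int) (binsize : Int) (pos2group : List (List Int))
    (res : PySem.Dict String (List Int)) :
    (PySem.List.pyRange 0 (PySem.List.len pos2group)).foldl
      (fun result j => pvAJBody cur2 cur1 binsize result (PySem.List.pyGetD pos2group j [])) res
    = pos2group.foldl (pvAJBody cur2 cur1 binsize) res := by
  simpa using PySem.List.foldl_pyRange_pyGetD pos2group []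
    (pvAJBody cur2 cur1 binsize) res (le_refl 0)

lemma pv_kfold_eq (cur2 cur1 : List Int) (grp : List Int) :
    (PySem.List.pyRange 0 (PySem.List.len grp)).foldl
      (fun np k => pvAKBody cur2 cur1 np (PySem.List.pyGetD grp k 0)) []
    = grp.foldl (pvAKBody cur2 cur1) [] := by
  simpa using PySem.List.foldl_pyRange_pyGetD grp 0 (pvAKBody cur2 cur1) [] (le_refl 0)

lemma pvAJBody_eq (cur2 cur1 : List Int) (binsize : Int)
    (res : PySem.Dict String (List Int)) (grp : List Int) :
    pvAJBody cur2 cur1 binsize res grp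
      = (pvPairs (pvAJRec cur2 cur1 binsize grp)).foldl
          (fun d p => d.modify p.1 [] (fun x => x ++ [p.2])) res := by
  unfold pvAJBody pvAJRec
  rw [pv_kfold_eq]
  rfl

lemma pvABody_eq (pos1list pos2list : List Int) (binsize : Int)
    (res : PySem.Dict String (List Int)) (g : List Int) :
    pvABody pos1list pos2list binsize res g
      = (pvRecA pos1list pos2list binsize g).foldl
          (fun d q => (pvPairs q).foldl
            (fun d p => d.modify p.1 [] (fun x => x ++ [p.2])) d) res := by
  unfold pvABody pvRecA pvRecACore
  generalize pvACtx pos1list pos2list g = ctx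
  obtain ⟨c2, c1, l2⟩ := ctx
  dsimp only
  split
  · rw [pv_jfold_eq, List.foldl_map]
    exact PySem.List.foldl_congr_mem _ _ _ _ (fun acc x _ => pvAJBody_eq _ _ _ _ _)
  · rfl

set_option maxHeartbeats 2000000 in
lemma pv_A_core (pos1list pos2list : List Int) (binsize : Int) (PG : List (List Int))
    (h : PG.flatMap (pvRecA pos1list pos2list binsize) ≠ []) :
    ((PySem.List.pyRange 0 (PySem.List.len PG)).foldl
      (fun result i => pvABody pos1list pos2list binsize result
        (PySem.List.pyGetD PG i [])) PySem.Dict.empty).items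
      = [("pos1_start", (PG.flatMap (pvRecA pos1list pos2list binsize)).map (·.1)),
         ("pos1_end", (PG.flatMap (pvRecA pos1list pos2list binsize)).map (·.2.1)),
         ("pos2_start", (PG.flatMap (pvRecA pos1list pos2list binsize)).map (·.2.2.1)),
         ("pos2_end", (PG.flatMap (pvRecA pos1list pos2list binsize)).map (·.2.2.2))] := by
  rw [pv_ifold_eq]
  rw [PySem.List.foldl_congr_mem _ (pvABody pos1list pos2list binsize)
      (fun d g => (pvRecA pos1list pos2list binsize g).foldl
      (fun d q => (pvPairs q).foldl
        (fun (d : PySem.Dict String (List Int)) p => d.modify p.1 [] (fun x => x ++ [p.2])) d) d)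
      PySem.Dict.empty (fun acc x _ => pvABody_eq _ _ _ _ _)]
  rw [pv_foldl_flatMap]
  exact pv_dict_items _ h

lemma pv_A_eq (pos1list pos2list : List Int) (binsize : Int)
    (h : ((pvGroup1 (PySem.List.sorted (PySem.Set.ofList pos1list)
        (fun v => (PySem.List.index? pos1list v).getD 0))).flatMap
          (pvRecA pos1list pos2list binsize)) ≠ []) :
    group_position pos1list pos2list binsize
      = [("pos1_start", ((pvGroup1 (PySem.List.sorted (PySem.Set.ofList pos1list)
            (fun v => (PySem.List.index? pos1list v).getD 0))).flatMap
              (pvRecA pos1list pos2list binsize)).map (·.1)),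
         ("pos1_end", ((pvGroup1 (PySem.List.sorted (PySem.Set.ofList pos1list)
            (fun v => (PySem.List.index? pos1list v).getD 0))).flatMap
              (pvRecA pos1list pos2list binsize)).map (·.2.1)),
         ("pos2_start", ((pvGroup1 (PySem.List.sorted (PySem.Set.ofList pos1list)
            (fun v => (PySem.List.index? pos1list v).getD 0))).flatMap
              (pvRecA pos1list pos2list binsize)).map (·.2.2.1)),
         ("pos2_end", ((pvGroup1 (PySem.List.sorted (PySem.Set.ofList pos1list)
            (fun v => (PySem.List.index? pos1list v).getD 0))).flatMap
              (pvRecA pos1list pos2list binsize)).map (·.2.2.2))] :=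
  pv_A_core pos1list pos2list binsize _ h

-- ---- facts about one run's slice context, under Pre_ ----
lemma pvBCtx_facts (pos1list pos2list : List Int)
    (hpre : pos1list ≠ [] ∧ pos1list.length ≤ pos2list.length)
    (r : Int × Int) (hr : r ∈ pvRuns (PySem.List.dedup pos1list)) :
    r.1 ∈ pos1list ∧ r.2 ∈ pos1list ∧ r.1 ≤ r.2 ∧
    (pvBCtx pos1list pos2list (pvFirst1 pos1list) (pvLast1 pos1list) r).2.1.length
      = (pvBCtx pos1list pos2list (pvFirst1 pos1list) (pvLast1 pos1list) r).1.length ∧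
    (pvBCtx pos1list pos2list (pvFirst1 pos1list) (pvLast1 pos1list) r).1 ≠ [] := by
  obtain ⟨hp1ne, hlen12⟩ := hpre
  have hd : PySem.List.dedup pos1list ≠ [] := pv_dedup_ne_nil pos1list hp1ne
  obtain ⟨hlohi, ⟨i, j, hij, hjlen, hdi, hdj⟩, hdense⟩ :=
    pvRuns_ok (PySem.List.dedup pos1list) hd r hr
  have hlo_mem : r.1 ∈ pos1list :=
    (PySem.List.mem_dedup _ _).mp (List.mem_of_getElem? hdi)
  have hhi_mem : r.2 ∈ pos1list :=
    (PySem.List.mem_dedup _ _).mp (List.mem_of_getElem? hdj)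
  obtain ⟨k1, hk1⟩ := Option.isSome_iff_exists.mp
    ((PySem.List.index?_isSome_iff pos1list r.1).mpr hlo_mem)
  obtain ⟨hk1lt, _, _⟩ := PySem.List.getElem_of_index?_eq_some hk1
  have hhir : r.2 ∈ pos1list.reverse := by simpa using hhi_mem
  obtain ⟨k2, hk2⟩ := Option.isSome_iff_exists.mp
    ((PySem.List.index?_isSome_iff pos1list.reverse r.2).mpr hhir)
  obtain ⟨hk2lt', hk2val, _⟩ := PySem.List.getElem_of_index?_eq_some hk2
  have hk2lt : k2 < pos1list.length := by
    rw [List.length_reverse] at hk2lt'; exact hk2lt'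
  have hk1k2 : k1 ≤ pos1list.length - 1 - k2 := by
    obtain ⟨k1', hk1'⟩ := Option.isSome_iff_exists.mp
      ((PySem.List.index?_isSome_iff pos1list r.2).mpr hhi_mem)
    have hab : k1 ≤ k1' := by
      have hpw := pv_pairwise_idx_ofList pos1list
      rw [← PySem.List.dedup_eq_ofList] at hpw
      obtain ⟨hilt, hival⟩ := List.getElem?_eq_some_iff.mp hdi
      obtain ⟨hjlt, hjval⟩ := List.getElem?_eq_some_iff.mp hdj
      rcases Nat.lt_or_ge i j with hlt | hge
      · have hpij := (List.pairwise_iff_getElem.mp hpw) i j hilt hjlt hlt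
        rw [hival, hjval, hk1, hk1'] at hpij
        simpa using Nat.le_of_lt hpij
      · have hieq : i = j := by omega
        subst hieq
        have heq : r.1 = r.2 := by rw [← hival, hjval]
        rw [heq, hk1'] at hk1
        simp at hk1
        omega
    have hpos : pos1list[pos1list.length - 1 - k2]'(by omega) = r.2 := by
      have hrev := hk2val
      rwa [List.getElem_reverse] at hrev
    have hb : k1' ≤ pos1list.length - 1 - k2 := by
      have hfi := pv_firstIdx_le pos1list r.2 (pos1list.length - 1 - k2) (by omega) hpos
      rwa [hk1', Option.getD_some] at hfi
    omega
  have hhiInt : PySem.List.len pos1list - 1 - ((k2 : Nat) : Int) + 1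
      = ((pos1list.length - k2 : Nat) : Int) := by
    rw [PySem.List.len_eq]; omega
  have hBc2 : (pvBCtx pos1list pos2list (pvFirst1 pos1list) (pvLast1 pos1list) r).1
      = (pos2list.drop k1).take (pos1list.length - k2 - k1) := by
    unfold pvBCtx
    dsimp only
    rw [pv_first1_getD pos1list r.1 hlo_mem, pv_last1_getD pos1list r.2 hhi_mem, hk1, hk2]
    simp only [Option.getD_some]
    rw [hhiInt, PySem.List.slice_natCast]
  have hBc1 : (pvBCtx pos1list pos2list (pvFirst1 pos1list) (pvLast1 pos1list) r).2.1
      = (pos1list.drop k1).take (pos1list.length - k2 - k1) := by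
    unfold pvBCtx
    dsimp only
    rw [pv_first1_getD pos1list r.1 hlo_mem, pv_last1_getD pos1list r.2 hhi_mem, hk1, hk2]
    simp only [Option.getD_some]
    rw [hhiInt, PySem.List.slice_natCast]
  have hlc2 : (pvBCtx pos1list pos2list (pvFirst1 pos1list) (pvLast1 pos1list) r).1.length
      = pos1list.length - k2 - k1 := by
    rw [hBc2]
    simp only [List.length_take, List.length_drop]
    omega
  have hlc1 : (pvBCtx pos1list pos2list (pvFirst1 pos1list) (pvLast1 pos1list) r).2.1.length
      = pos1list.length - k2 - k1 := by
    rw [hBc1]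
    simp only [List.length_take, List.length_drop]
    omega
  refine ⟨hlo_mem, hhi_mem, hlohi, by omega, ?_⟩
  intro hnil
  rw [hnil] at hlc2
  simp at hlc2
  omega

-- ---- A's per-run records = the scaled reference records ----
set_option maxHeartbeats 400000 in
lemma pv_rec_core_eq (c2 c1 l2 : List Int) (binsize : Int) (r : Int × Int)
    (hl2 : l2 = PySem.List.sorted (PySem.Set.ofList c2) (fun x => x))
    (hlen : c1.length = c2.length) (hc2ne : c2 ≠ []) (hlohi : r.1 ≤ r.2) :
    pvRecACore c2 c1 l2 binsize (pvRangeF r) = pvRecBCore c2 c1 l2 binsize r := by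
  have hl2ne : l2 ≠ [] := by
    rw [hl2, Ne, PySem.List.sorted_eq_nil_iff]
    intro hofnil
    obtain ⟨x, t, hxe⟩ := List.exists_cons_of_ne_nil hc2ne
    have hx : x ∈ PySem.Set.ofList c2 :=
      (PySem.Set.mem_ofList _ _).mpr (by rw [hxe]; exact List.mem_cons_self ..)
    rw [hofnil] at hx
    simp at hx
  have hl2sub : ∀ v ∈ l2, v ∈ c2 := by
    intro v hv
    rw [hl2, PySem.List.mem_sorted] at hv
    exact (PySem.Set.mem_ofList _ _).mp hv
  unfold pvRecACore pvRecBCore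
  rw [pvGroup1_eq l2 hl2ne]
  have hr2ne : pvRuns l2 ≠ [] := pvRuns_ne_nil l2
  dsimp only
  by_cases hgt : 1 < (pvRuns l2).length
  · rw [if_pos (by simp only [PySem.List.len_eq, List.length_map]; exact_mod_cast hgt),
      if_pos hgt, List.map_map]
    apply List.map_congr_left
    intro r2 hr2
    obtain ⟨h2lohi, _, h2dense⟩ := pvRuns_ok l2 hl2ne r2 hr2
    have hmem2 : ∀ v ∈ pvRangeF r2, v ∈ c2 := by
      intro v hv
      have hvr : r2.1 ≤ v ∧ v ≤ r2.2 := by simpa [pvRangeF] using hv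
      exact hl2sub v (h2dense v hvr.1 hvr.2)
    simp only [Function.comp_def, pvAJRec]
    rw [show PySem.List.pyRange r2.1 (r2.2 + 1) = pvRangeF r2 from rfl]
    have hnp0 : (pvRangeF r2).foldl (pvAKBody c2 c1) []
        = (pvRangeF r2).map (fun v => PySem.List.pyGetD c1
            (((PySem.List.index? c2 v).getD 0 : Nat) : Int) 0) := by
      unfold pvAKBody
      rw [PySem.List.foldl_append_if]
      rw [List.filter_eq_self.mpr (fun a ha => pv_contains_of_mem c2 a (hmem2 a ha))]
      simp
    have hvals : ∀ v ∈ pvRangeF r2,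
        PySem.List.pyGetD c1 (((PySem.List.index? c2 v).getD 0 : Nat) : Int) 0
        = ((c2.zip c1).foldl (fun m p => m.setdefault p.1 p.2)
            (PySem.Dict.empty : PySem.Dict Int Int)).getD v 0 := by
      intro v hv
      have hvc2 : v ∈ c2 := hmem2 v hv
      obtain ⟨kv, hkv⟩ := Option.isSome_iff_exists.mp
        ((PySem.List.index?_isSome_iff c2 v).mpr hvc2)
      obtain ⟨hkvlt, _, _⟩ := PySem.List.getElem_of_index?_eq_some hkv
      rw [pv_getD_eq, pv_zipm_get? c2 c1 PySem.Dict.empty v (by omega), hkv]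
      rw [show (PySem.Dict.empty : PySem.Dict Int Int).get? v = none from rfl, pv_none_or]
      have hget : c1[kv]? = some c1[kv] := List.getElem?_eq_getElem (by omega)
      simp [hget, List.getD_eq_getElem?_getD]
    have hmapeq : (pvRangeF r2).map (fun v => PySem.List.pyGetD c1
          (((PySem.List.index? c2 v).getD 0 : Nat) : Int) 0)
        = (pvRangeF r2).map (fun v => ((c2.zip c1).foldl
            (fun m p => m.setdefault p.1 p.2) (PySem.Dict.empty : PySem.Dict Int Int)).getD v 0) :=
      List.map_congr_left hvals
    have hnp0ne : (pvRangeF r2).foldl (pvAKBody c2 c1) [] ≠ [] := by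
      rw [hnp0]
      intro hnil
      rw [List.map_eq_nil_iff] at hnil
      exact pvRangeF_ne_nil r2 h2lohi hnil
    rw [pv_sorted_head_min _ hnp0ne, pv_sorted_last_max _ hnp0ne,
      pvRangeF_head r2 h2lohi, pvRangeF_last r2 h2lohi, hnp0, hmapeq]
  · rw [if_neg (by simp only [PySem.List.len_eq, List.length_map]; exact_mod_cast hgt),
      if_neg hgt]
    obtain ⟨r20, rest2, hr2cons⟩ := List.exists_cons_of_ne_nil hr2ne
    have h20 : r20 ∈ pvRuns l2 := by rw [hr2cons]; exact List.mem_cons_self ..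
    obtain ⟨h20lohi, _, _⟩ := pvRuns_ok l2 hl2ne r20 h20
    rw [pvRangeF_head r hlohi, pvRangeF_last r hlohi, hr2cons]
    simp only [List.map_cons, PySem.List.pyGetD_zero_cons]
    rw [pvRangeF_head r20 h20lohi, pvRangeF_last r20 h20lohi]

set_option maxHeartbeats 400000 in
lemma pv_rec_eq (pos1list pos2list : List Int) (binsize : Int)
    (hpre : pos1list ≠ [] ∧ pos1list.length ≤ pos2list.length)
    (r : Int × Int) (hr : r ∈ pvRuns (PySem.List.dedup pos1list)) :
    pvRecA pos1list pos2list binsize (pvRangeF r)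
      = pvRecB pos1list pos2list binsize (pvFirst1 pos1list) (pvLast1 pos1list) r := by
  obtain ⟨hlo_mem, hhi_mem, hlohi, hlen, hc2ne⟩ := pvBCtx_facts pos1list pos2list hpre r hr
  have hctx : pvACtx pos1list pos2list (pvRangeF r)
      = pvBCtx pos1list pos2list (pvFirst1 pos1list) (pvLast1 pos1list) r := by
    unfold pvACtx pvBCtx
    dsimp only
    rw [pvRangeF_head r hlohi, pvRangeF_last r hlohi,
      PySem.List.slice?_none_none_neg_one, Option.getD_some,
      pv_first1_getD pos1list r.1 hlo_mem, pv_last1_getD pos1list r.2 hhi_mem,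
      pv_l2_eq]
  have hBl2 : (pvBCtx pos1list pos2list (pvFirst1 pos1list) (pvLast1 pos1list) r).2.2
      = PySem.List.sorted (PySem.Set.ofList
          (pvBCtx pos1list pos2list (pvFirst1 pos1list) (pvLast1 pos1list) r).1)
        (fun x => x) := rfl
  unfold pvRecA pvRecB
  rw [hctx]
  exact pv_rec_core_eq _ _ _ binsize r hBl2 hlen hc2ne hlohi

lemma pv_recB_ne_nil (pos1list pos2list : List Int) (binsize : Int)
    (first1 last1 : PySem.Dict Int Int) (r : Int × Int) :
    pvRecB pos1list pos2list binsize first1 last1 r ≠ [] := by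
  unfold pvRecB pvRecBCore
  dsimp only
  split
  · rename_i hgt
    intro hnil
    rw [List.map_eq_nil_iff] at hnil
    rw [hnil] at hgt
    simp at hgt
  · simp

-- ---- B-side: min/max of a range extended by its successor ----
lemma pv_min_snoc (L : List Int) (hL : L ≠ []) (p : Int) :
    (PySem.List.min? (L ++ [p]) (fun x => x)).getD 0
      = (if p < (PySem.List.min? L (fun x => x)).getD 0 then p
         else (PySem.List.min? L (fun x => x)).getD 0) := by
  obtain ⟨x, t, rfl⟩ := List.exists_cons_of_ne_nil hL
  rw [List.cons_append, PySem.List.min?_id_cons, PySem.List.min?_id_cons]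
  simp only [Option.getD_some, List.foldl_append, List.foldl_cons, List.foldl_nil]
  rw [Int.min_def]
  split_ifs <;> omega

lemma pv_max_snoc (L : List Int) (hL : L ≠ []) (p : Int) :
    (PySem.List.max? (L ++ [p]) (fun x => x)).getD 0
      = (if (PySem.List.max? L (fun x => x)).getD 0 < p then p
         else (PySem.List.max? L (fun x => x)).getD 0) := by
  obtain ⟨x, t, rfl⟩ := List.exists_cons_of_ne_nil hL
  rw [List.cons_append, PySem.List.max?_id_cons, PySem.List.max?_id_cons]
  simp only [Option.getD_some, List.foldl_append, List.foldl_cons, List.foldl_nil]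
  rw [Int.max_def]
  split_ifs <;> omega

lemma pv_rangeMap_ne_nil (m : PySem.Dict Int Int) (lo prev : Int) (h : lo ≤ prev) :
    (PySem.List.pyRange lo (prev + 1)).map (fun v => m.getD v 0) ≠ [] := by
  rw [PySem.List.pyRange_one_cons (by omega)]
  simp

-- ---- B's fused aggregation loop = runs + min/max over each run ----
lemma pvAggLoop_eq (m : PySem.Dict Int Int) (t : List Int) :
    ∀ (recs : List (Int × Int × Int × Int)) (mn mx lo prev : Int),
      lo ≤ prev →
      mn = (PySem.List.min? ((PySem.List.pyRange lo (prev + 1)).map (fun v => m.getD v 0))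
        (fun x => x)).getD 0 →
      mx = (PySem.List.max? ((PySem.List.pyRange lo (prev + 1)).map (fun v => m.getD v 0))
        (fun x => x)).getD 0 →
      pvAggLoop m t recs mn mx lo prev
        = (recs ++ (pvRunsLoop t [] lo prev).map (pvG m), pvLastRun t lo prev) := by
  induction t with
  | nil =>
    intro recs mn mx lo prev hlp hmn hmx
    simp only [pvAggLoop, pvRunsLoop, pvLastRun, List.nil_append, List.map_cons, List.map_nil]
    rw [hmn, hmx]
    rfl
  | cons v t ih =>
    intro recs mn mx lo prev hlp hmn hmx
    simp only [pvAggLoop, pvRunsLoop, pvLastRun]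
    by_cases hc : (v - prev == 1) = true
    · have hv : v = prev + 1 := by
        have := beq_iff_eq.mp hc
        omega
      simp only [if_pos hc, if_neg (show ¬((v - prev != 1) = true) by simp [beq_iff_eq.mp hc])]
      have hrange : PySem.List.pyRange lo (v + 1)
          = PySem.List.pyRange lo (prev + 1) ++ [v] := by
        rw [hv]
        exact PySem.List.pyRange_one_succ_right (by omega)
      have hLne := pv_rangeMap_ne_nil m lo prev hlp
      refine ih _ _ _ _ _ (by omega) ?_ ?_
      · rw [hrange, List.map_append, List.map_singleton,
          pv_min_snoc _ hLne, ← hmn]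
      · rw [hrange, List.map_append, List.map_singleton,
          pv_max_snoc _ hLne, ← hmx]
    · simp only [if_neg hc, if_pos (show ((v - prev != 1) = true) by simpa using hc)]
      have hrec : (mn, mx, lo, prev) = pvG m (lo, prev) := by
        unfold pvG
        rw [hmn, hmx]
      have hsing : ∀ x : Int,
          (PySem.List.min? [m.getD x 0] (fun y => y)).getD 0 = m.getD x 0 ∧
          (PySem.List.max? [m.getD x 0] (fun y => y)).getD 0 = m.getD x 0 := by
        intro x
        constructor
        · rw [PySem.List.min?_id_cons]; rfl
        · rw [PySem.List.max?_id_cons]; rfl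
      rw [ih _ _ _ _ _ le_rfl
        (by rw [PySem.List.pyRange_one_singleton, List.map_singleton]; exact ((hsing v).1).symm)
        (by rw [PySem.List.pyRange_one_singleton, List.map_singleton]; exact ((hsing v).2).symm)]
      rw [show ([] : List (Int × Int)) ++ [(lo, prev)] = [(lo, prev)] ++ [] by simp,
        pvRunsLoop_acc]
      simp only [List.map_append, List.map_cons, List.map_nil, ← hrec]
      rw [List.append_assoc]


-- ---- B's first-occurrence dict and its keys ----
lemma pv_dict_contains_keys (d : PySem.Dict Int Int) (k : Int) :
    d.contains k = PySem.Set.contains d.keys k := by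
  rw [Bool.eq_iff_iff]
  simp only [PySem.Dict.contains, PySem.Dict.keys, PySem.Set.contains_eq_listContains,
    List.any_eq_true, List.contains_iff_mem, List.mem_map, beq_iff_eq]

lemma pv_keys_setdefault_fold (l : List (Int × Int)) :
    ∀ (d : PySem.Dict Int Int),
    (l.foldl (fun d p => d.setdefault p.1 p.2) d).keys
      = PySem.Set.update d.keys (l.map (·.1)) := by
  induction l with
  | nil => intro d; simp [PySem.Set.update]
  | cons p t ih =>
    intro d
    simp only [List.foldl_cons, List.map_cons, PySem.Set.update_cons]
    rw [ih]
    congr 1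
    rw [PySem.Dict.keys_setdefault]
    show _ = PySem.Set.add d.keys p.1
    unfold PySem.Set.add
    rw [pv_dict_contains_keys]

lemma pv_cond_insert_eq_setdefault (l : List (Int × Int)) (d : PySem.Dict Int Int) :
    l.foldl (fun (m : PySem.Dict Int Int) p =>
        if m.contains p.1 then m else m.insert p.1 p.2) d
      = l.foldl (fun m p => m.setdefault p.1 p.2) d := by
  refine PySem.List.foldl_congr_mem _ _ _ _ (fun acc x _ => ?_)
  by_cases hc : acc.contains x.1 = true
  · rw [if_pos hc, PySem.Dict.setdefault_of_contains _ _ hc]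
  · rw [if_neg (by simp [hc]),
      PySem.Dict.setdefault_of_not_contains _ _ (by simpa using hc)]

-- ---- flush's core = the scaled reference record of one pos1 run ----
set_option maxHeartbeats 400000 in
lemma pvFlushCore_eq (c2 c1 : List Int) (binsize lo hi : Int)
    (hlen : c1.length = c2.length) (hc2ne : c2 ≠ []) :
    (pvFlushCore c2 c1 lo hi).map (pvScale binsize)
      = pvRecBCore c2 c1 (PySem.List.sorted (PySem.Set.ofList c2) (fun x => x)) binsize
          (lo, hi) := by
  have hm := pv_cond_insert_eq_setdefault (c2.zip c1) PySem.Dict.empty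
  set m := (c2.zip c1).foldl (fun m p => m.setdefault p.1 p.2)
    (PySem.Dict.empty : PySem.Dict Int Int) with hmdef
  have hkeys : m.keys = PySem.Set.ofList c2 := by
    rw [hmdef, pv_keys_setdefault_fold]
    rw [show (PySem.Dict.empty : PySem.Dict Int Int).keys = [] from rfl,
      PySem.Set.update_nil_left]
    congr 1
    exact List.map_fst_zip (by omega)
  have hl2ne : PySem.List.sorted (PySem.Set.ofList c2) (fun x => x) ≠ [] := by
    rw [Ne, PySem.List.sorted_eq_nil_iff]
    intro hofnil
    obtain ⟨x, t, hxe⟩ := List.exists_cons_of_ne_nil hc2ne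
    have hx : x ∈ PySem.Set.ofList c2 :=
      (PySem.Set.mem_ofList _ _).mpr (by rw [hxe]; exact List.mem_cons_self ..)
    rw [hofnil] at hx
    simp at hx
  obtain ⟨v, t, hvt⟩ := List.exists_cons_of_ne_nil hl2ne
  have hruns : pvRuns (PySem.List.sorted (PySem.Set.ofList c2) (fun x => x))
      = pvRunsLoop t [] v v := by
    rw [pvRuns, hvt, PySem.List.slice_from_one]
    simp [PySem.List.pyGetD_zero_cons]
  have hsing : (PySem.List.min? [m.getD v 0] (fun y => y)).getD 0 = m.getD v 0 := by
    rw [PySem.List.min?_id_cons]; rfl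
  have hsingx : (PySem.List.max? [m.getD v 0] (fun y => y)).getD 0 = m.getD v 0 := by
    rw [PySem.List.max?_id_cons]; rfl
  have hAgg : pvAggState m (v :: t) lo hi
      = ((pvRunsLoop t [] v v).map (pvG m), pvLastRun t v v) := by
    simp only [pvAggState]
    rw [pvAggLoop_eq m t [] _ _ v v le_rfl
      (by rw [PySem.List.pyRange_one_singleton, List.map_singleton]; exact hsing.symm)
      (by rw [PySem.List.pyRange_one_singleton, List.map_singleton]; exact hsingx.symm)]
    rw [List.nil_append]
  have hcore : pvFlushCore c2 c1 lo hi
      = (if ((pvRunsLoop t [] v v).map (pvG m)).length == 1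
         then [(lo, hi, (pvLastRun t v v).1, (pvLastRun t v v).2)]
         else (pvRunsLoop t [] v v).map (pvG m)) := by
    unfold pvFlushCore
    rw [hm]
    unfold pvFlushAfter
    show (if (pvAggState m (PySem.List.sorted m.keys (fun x => x)) lo hi).1.length == 1
        then [(lo, hi, (pvAggState m (PySem.List.sorted m.keys (fun x => x)) lo hi).2.1,
          (pvAggState m (PySem.List.sorted m.keys (fun x => x)) lo hi).2.2)]
        else (pvAggState m (PySem.List.sorted m.keys (fun x => x)) lo hi).1) = _
    rw [hkeys, hvt, hAgg]
  rw [hcore, ← hruns]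
  set ks := PySem.List.sorted (PySem.Set.ofList c2) (fun x => x) with hksdef
  have hrne : pvRuns ks ≠ [] := pvRuns_ne_nil ks
  have hlast : pvLastRun t v v = (pvRuns ks).getLastD (0, 0) := by
    rw [hksdef, hruns, pvRunsLoop_getLastD]
  unfold pvRecBCore
  dsimp only
  rw [← hmdef]
  by_cases h1 : (pvRuns ks).length = 1
  · obtain ⟨r0, hr0⟩ := List.length_eq_one_iff.mp h1
    rw [if_pos (by simp [List.length_map, h1]), if_neg (by omega)]
    rw [hlast, hr0]
    simp only [List.map_cons, List.map_nil, PySem.List.pyGetD_zero_cons]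
    rfl
  · have hgt : 1 < (pvRuns ks).length := by
      have := List.length_pos_iff.mpr hrne
      omega
    rw [if_neg (by simp [List.length_map]; omega), if_pos hgt, List.map_map]
    apply List.map_congr_left
    intro r2 _
    simp [pvScale, pvG]

-- ---- flush = the reference record of one pos1 run ----
lemma pvFlush_eq (pos1list pos2list : List Int) (binsize : Int)
    (hpre : pos1list ≠ [] ∧ pos1list.length ≤ pos2list.length)
    (r : Int × Int) (hr : r ∈ pvRuns (PySem.List.dedup pos1list)) :
    (pvFlush pos1list pos2list (pvLast1 pos1list) r.1 r.2
        (((PySem.List.index? pos1list r.1).getD 0 : Nat) : Int)).map (pvScale binsize)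
      = pvRecB pos1list pos2list binsize (pvFirst1 pos1list) (pvLast1 pos1list) r := by
  obtain ⟨hlo_mem, hhi_mem, hlohi, hlen, hc2ne⟩ := pvBCtx_facts pos1list pos2list hpre r hr
  have hs : (((PySem.List.index? pos1list r.1).getD 0 : Nat) : Int)
      = (pvFirst1 pos1list).getD r.1 0 := (pv_first1_getD pos1list r.1 hlo_mem).symm
  have hflush : pvFlush pos1list pos2list (pvLast1 pos1list) r.1 r.2
      (((PySem.List.index? pos1list r.1).getD 0 : Nat) : Int)
      = pvFlushCore (pvBCtx pos1list pos2list (pvFirst1 pos1list) (pvLast1 pos1list) r).1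
          (pvBCtx pos1list pos2list (pvFirst1 pos1list) (pvLast1 pos1list) r).2.1 r.1 r.2 := by
    unfold pvFlush pvBCtx
    rw [hs]
  rw [hflush]
  unfold pvRecB
  exact pvFlushCore_eq _ _ binsize r.1 r.2 hlen hc2ne

-- ---- B's outer scan: seen-set filtering, then run grouping ----
lemma pv_set_contains_decide (S : List Int) (v : Int) :
    PySem.Set.contains S v = decide (v ∈ S) := by
  rw [Bool.eq_iff_iff]
  simp [PySem.Set.contains_eq_listContains, List.contains_iff_mem]

lemma pvScanLoop_eq_NS (pos1list pos2list : List Int) (last : PySem.Dict Int Int)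
    (rest : List (Int × Int)) :
    ∀ (recs : List (Int × Int × Int × Int)) (seen : PySem.Set Int) (lo hi s : Int),
    pvScanLoop pos1list pos2list last rest recs seen lo hi s
      = pvScanNS pos1list pos2list last (pvFirstOccs seen rest) recs lo hi s := by
  induction rest with
  | nil => intro recs seen lo hi s; rfl
  | cons p t ih =>
    intro recs seen lo hi s
    obtain ⟨i, v⟩ := p
    simp only [pvScanLoop, pvFirstOccs]
    by_cases hc : PySem.Set.contains seen v = true
    · rw [if_pos hc, if_pos hc]
      exact ih _ _ _ _ _
    · rw [if_neg hc, if_neg hc]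
      simp only [pvScanNS]
      by_cases hd : (v - hi == 1) = true
      · rw [if_pos hd, if_pos hd]
        exact ih _ _ _ _ _
      · rw [if_neg hd, if_neg hd]
        exact ih _ _ _ _ _

lemma pvRunsLoopI_acc (rest : List (Int × Int)) :
    ∀ (a b : List (Int × Int × Int)) (lo prev s : Int),
    pvRunsLoopI rest (a ++ b) lo prev s = a ++ pvRunsLoopI rest b lo prev s := by
  induction rest with
  | nil => intro a b lo prev s; simp [pvRunsLoopI]
  | cons p t ih =>
    intro a b lo prev s
    obtain ⟨i, v⟩ := p
    simp only [pvRunsLoopI]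
    split
    · exact ih _ _ _ _ _
    · rw [List.append_assoc, ih]

lemma pvScanNS_eq (pos1list pos2list : List Int) (last : PySem.Dict Int Int)
    (rest : List (Int × Int)) :
    ∀ (recs : List (Int × Int × Int × Int)) (lo hi s : Int),
    pvScanNS pos1list pos2list last rest recs lo hi s
      = recs ++ (pvRunsLoopI rest [] lo hi s).flatMap
          (fun q => pvFlush pos1list pos2list last q.1 q.2.1 q.2.2) := by
  induction rest with
  | nil =>
    intro recs lo hi s
    simp [pvScanNS, pvRunsLoopI]
  | cons p t ih =>
    intro recs lo hi s
    obtain ⟨i, v⟩ := p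
    simp only [pvScanNS, pvRunsLoopI]
    by_cases hd : (v - hi == 1) = true
    · rw [if_pos hd, if_pos hd]
      exact ih _ _ _ _
    · rw [if_neg hd, if_neg hd]
      rw [ih]
      rw [show ([] : List (Int × Int × Int)) ++ [(lo, hi, s)] = [(lo, hi, s)] ++ [] by simp,
        pvRunsLoopI_acc]
      simp [List.append_assoc]

lemma pvRunsLoopI_map (idxFn : Int → Int) (vals : List Int) :
    ∀ (res : List (Int × Int)) (lo prev : Int),
    pvRunsLoopI (vals.map (fun v => (idxFn v, v)))
        (res.map (fun r : Int × Int => (r.1, r.2, idxFn r.1))) lo prev (idxFn lo)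
      = (pvRunsLoop vals res lo prev).map (fun r => (r.1, r.2, idxFn r.1)) := by
  induction vals with
  | nil =>
    intro res lo prev
    simp [pvRunsLoopI, pvRunsLoop]
  | cons v t ih =>
    intro res lo prev
    simp only [List.map_cons, pvRunsLoopI, pvRunsLoop]
    by_cases hc : (v - prev == 1) = true
    · rw [if_pos hc, if_neg (show ¬((v - prev != 1) = true) by simp [beq_iff_eq.mp hc])]
      exact ih _ _ _
    · rw [if_neg hc, if_pos (show ((v - prev != 1) = true) by simpa using hc)]
      rw [show (res.map (fun r : Int × Int => (r.1, r.2, idxFn r.1))) ++ [(lo, prev, idxFn lo)]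
          = (res ++ [(lo, prev)]).map (fun r : Int × Int => (r.1, r.2, idxFn r.1)) by
        simp]
      exact ih _ _ _

-- ---- the first-occurrence subsequence of enumerate ----
lemma pvFirstOccs_enum (xs : List Int) :
    ∀ (s : Int) (S : PySem.Set Int),
    pvFirstOccs S (PySem.List.enumerate xs s)
      = ((PySem.Set.ofList xs).filter (fun v => !PySem.Set.contains S v)).map
          (fun v => (s + (((PySem.List.index? xs v).getD 0 : Nat) : Int), v)) := by
  induction xs with
  | nil => intro s S; simp [PySem.List.enumerate, PySem.Set.ofList_nil, pvFirstOccs]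
  | cons x t ih =>
    intro s S
    rw [PySem.List.enumerate_cons]
    simp only [pvFirstOccs, PySem.Set.ofList_cons]
    have hdisc : PySem.Set.discard (PySem.Set.ofList t) x
        = (PySem.Set.ofList t).filter (fun y => !(y == x)) := rfl
    by_cases hx : PySem.Set.contains S x = true
    · have hxmem : x ∈ S := by
        rw [pv_set_contains_decide] at hx
        simpa using hx
      rw [if_pos hx, ih (s + 1) S]
      rw [List.filter_cons_of_neg (by simp [hx, hxmem]), hdisc, List.filter_filter]
      rw [List.filter_congr (fun v _ => show
          ((fun v => !PySem.Set.contains S v) v && (fun y => !(y == x)) v)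
            = (fun v => !PySem.Set.contains S v) v by
        simp only [pv_set_contains_decide]
        by_cases hvx : v = x
        · subst hvx
          simp [hxmem]
        · simp [hvx])]
      apply List.map_congr_left
      intro v hv
      have hvS : v ∉ S := by
        have := (List.mem_filter.mp hv).2
        rw [pv_set_contains_decide] at this
        simpa using this
      have hvne : v ≠ x := fun h => hvS (h ▸ hxmem)
      have hvt : v ∈ t := (PySem.Set.mem_ofList t v).mp (List.mem_filter.mp hv).1
      obtain ⟨k, hk⟩ := Option.isSome_iff_exists.mp
        ((PySem.List.index?_isSome_iff t v).mpr hvt)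
      rw [PySem.List.index?_cons_of_ne t (fun h => hvne h.symm), hk]
      simp only [Option.map_some, Option.getD_some]
      rw [Prod.mk.injEq]
      refine ⟨?_, rfl⟩
      push_cast
      ring
    · have hxS : x ∉ S := by
        rw [pv_set_contains_decide] at hx
        simpa using hx
      rw [if_neg hx, ih (s + 1) (PySem.Set.add S x)]
      rw [List.filter_cons_of_pos (by simp [hx, hxS])]
      rw [List.map_cons]
      congr 1
      · rw [PySem.List.index?_cons_self]
        simp
      · rw [hdisc, List.filter_filter]
        have hfc : List.filter (fun v => !PySem.Set.contains (PySem.Set.add S x) v)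
              (PySem.Set.ofList t)
            = List.filter (fun a => !PySem.Set.contains S a && !(a == x))
              (PySem.Set.ofList t) :=
          List.filter_congr (fun v _ => by
            simp only [pv_set_contains_decide, PySem.Set.add_of_not_mem hxS]
            by_cases hvx : v = x
            · subst hvx
              simp
            · simp [hvx])
        rw [hfc]
        apply List.map_congr_left
        intro v hv
        have hvne : v ≠ x := by
          have := (List.mem_filter.mp hv).2
          intro h
          subst h
          simp at this
        have hvt : v ∈ t := (PySem.Set.mem_ofList t v).mp (List.mem_filter.mp hv).1
        obtain ⟨k, hk⟩ := Option.isSome_iff_exists.mp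
          ((PySem.List.index?_isSome_iff t v).mpr hvt)
        rw [PySem.List.index?_cons_of_ne t (fun h => hvne h.symm), hk]
        simp only [Option.map_some, Option.getD_some]
        rw [Prod.mk.injEq]
        refine ⟨?_, rfl⟩
        push_cast
        ring


-- ---- B as the flatMap of the reference records over the pos1 runs ----
set_option maxHeartbeats 1000000 in
lemma pv_B_eq (pos1list pos2list : List Int) (binsize : Int)
    (hpre : pos1list ≠ [] ∧ pos1list.length ≤ pos2list.length) :
    group_position_alt pos1list pos2list binsize
      = [("pos1_start", ((pvRuns (PySem.List.dedup pos1list)).flatMap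
            (pvRecB pos1list pos2list binsize (pvFirst1 pos1list) (pvLast1 pos1list))).map (·.1)),
         ("pos1_end", ((pvRuns (PySem.List.dedup pos1list)).flatMap
            (pvRecB pos1list pos2list binsize (pvFirst1 pos1list) (pvLast1 pos1list))).map (·.2.1)),
         ("pos2_start", ((pvRuns (PySem.List.dedup pos1list)).flatMap
            (pvRecB pos1list pos2list binsize (pvFirst1 pos1list) (pvLast1 pos1list))).map (·.2.2.1)),
         ("pos2_end", ((pvRuns (PySem.List.dedup pos1list)).flatMap
            (pvRecB pos1list pos2list binsize (pvFirst1 pos1list) (pvLast1 pos1list))).map (·.2.2.2))] := by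
  obtain ⟨x, t, rfl⟩ := List.exists_cons_of_ne_nil hpre.1
  unfold group_position_alt pvOut
  have hlast : (PySem.List.enumerate (x :: t)).foldl
      (fun (d : PySem.Dict Int Int) p => d.insert p.2 p.1) PySem.Dict.empty
      = pvLast1 (x :: t) := rfl
  rw [hlast]
  have hdisc : PySem.Set.discard (PySem.Set.ofList t) x
      = (PySem.Set.ofList t).filter (fun y => !(y == x)) := rfl
  have hscan : pvScanStart (x :: t) pos2list (pvLast1 (x :: t)) (PySem.List.enumerate (x :: t))
      = (pvRuns (PySem.List.dedup (x :: t))).flatMap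
          (fun r => pvFlush (x :: t) pos2list (pvLast1 (x :: t)) r.1 r.2
            (((PySem.List.index? (x :: t) r.1).getD 0 : Nat) : Int)) := by
    rw [PySem.List.enumerate_cons]
    show pvScanLoop (x :: t) pos2list (pvLast1 (x :: t)) (PySem.List.enumerate t (0 + 1)) []
        (PySem.Set.add PySem.Set.empty x) x x 0 = _
    rw [pvScanLoop_eq_NS]
    rw [show PySem.Set.add PySem.Set.empty x = [x] from
      PySem.Set.add_of_not_mem (by simp)]
    have hD' : pvFirstOccs [x] (PySem.List.enumerate t (0 + 1))
        = (PySem.Set.discard (PySem.Set.ofList t) x).map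
            (fun v => ((((PySem.List.index? (x :: t) v).getD 0 : Nat) : Int), v)) := by
      rw [pvFirstOccs_enum t (0 + 1) [x]]
      have hfilt : (PySem.Set.ofList t).filter (fun v => !PySem.Set.contains [x] v)
          = PySem.Set.discard (PySem.Set.ofList t) x := by
        rw [hdisc]
        refine List.filter_congr (fun v _ => ?_)
        simp only [pv_set_contains_decide]
        by_cases hvx : v = x
        · subst hvx
          simp
        · simp [hvx]
      rw [hfilt]
      apply List.map_congr_left
      intro v hv
      have hvne : v ≠ x := by
        rw [hdisc] at hv
        have := (List.mem_filter.mp hv).2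
        intro h
        subst h
        simp at this
      have hvt : v ∈ t := by
        rw [hdisc] at hv
        exact (PySem.Set.mem_ofList t v).mp (List.mem_filter.mp hv).1
      obtain ⟨k, hk⟩ := Option.isSome_iff_exists.mp
        ((PySem.List.index?_isSome_iff t v).mpr hvt)
      rw [PySem.List.index?_cons_of_ne t (fun h => hvne h.symm), hk]
      simp only [Option.map_some, Option.getD_some]
      rw [Prod.mk.injEq]
      refine ⟨?_, rfl⟩
      push_cast
      ring
    rw [pvScanNS_eq, hD']
    have hx0 : (((PySem.List.index? (x :: t) x).getD 0 : Nat) : Int) = 0 := by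
      rw [PySem.List.index?_cons_self]
      rfl
    have hI := pvRunsLoopI_map (fun v => (((PySem.List.index? (x :: t) v).getD 0 : Nat) : Int))
      (PySem.Set.discard (PySem.Set.ofList t) x) [] x x
    simp only [List.map_nil, hx0] at hI
    rw [hI]
    have hruns : pvRuns (PySem.List.dedup (x :: t))
        = pvRunsLoop (PySem.Set.discard (PySem.Set.ofList t) x) [] x x := by
      rw [show PySem.List.dedup (x :: t) = x :: PySem.Set.discard (PySem.Set.ofList t) x by
        rw [PySem.List.dedup_eq_ofList, PySem.Set.ofList_cons]]
      rw [pvRuns, PySem.List.slice_from_one]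
      simp [PySem.List.pyGetD_zero_cons]
    rw [hruns, List.nil_append, List.flatMap_map]
  rw [hscan]
  have hmapscale : ((pvRuns (PySem.List.dedup (x :: t))).flatMap
      (fun r => pvFlush (x :: t) pos2list (pvLast1 (x :: t)) r.1 r.2
        (((PySem.List.index? (x :: t) r.1).getD 0 : Nat) : Int))).map (pvScale binsize)
      = (pvRuns (PySem.List.dedup (x :: t))).flatMap
          (pvRecB (x :: t) pos2list binsize (pvFirst1 (x :: t)) (pvLast1 (x :: t))) := by
    rw [List.map_flatMap]
    exact pv_flatMap_congr _ _ _ (fun r hr => pvFlush_eq (x :: t) pos2list binsize hpre r hr)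
  have hproj : ∀ (f : Int × Int × Int × Int → Int) (g : Int × Int × Int × Int → Int),
      (∀ q, f q = g (pvScale binsize q)) →
      ((pvRuns (PySem.List.dedup (x :: t))).flatMap
        (fun r => pvFlush (x :: t) pos2list (pvLast1 (x :: t)) r.1 r.2
          (((PySem.List.index? (x :: t) r.1).getD 0 : Nat) : Int))).map f
      = ((pvRuns (PySem.List.dedup (x :: t))).flatMap
          (pvRecB (x :: t) pos2list binsize (pvFirst1 (x :: t)) (pvLast1 (x :: t)))).map g := by
    intro f g hfg
    rw [← hmapscale, List.map_map]
    apply List.map_congr_left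
    intro q _
    exact hfg q
  rw [hproj (fun q => q.1 * binsize) (·.1) (fun q => rfl),
    hproj (fun q => q.2.1 * binsize + binsize) (·.2.1) (fun q => rfl),
    hproj (fun q => q.2.2.1 * binsize) (·.2.2.1) (fun q => rfl),
    hproj (fun q => q.2.2.2 * binsize + binsize) (·.2.2.2) (fun q => rfl)]


-- ===== VERDICT (by name: the statement is the Claim_ definition above) =====
theorem group_position_spec : Claim_equal_group_position := by
  intro pos1list pos2list binsize _hdom hpre
  unfold Spec_group_position
  obtain ⟨h1, h2⟩ := hpre
  have hl1 : PySem.List.sorted (PySem.Set.ofList pos1list)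
      (fun v => (PySem.List.index? pos1list v).getD 0) = PySem.List.dedup pos1list := by
    rw [pv_sorted_idx_ofList, PySem.List.dedup_eq_ofList]
  have hd : PySem.List.dedup pos1list ≠ [] := pv_dedup_ne_nil pos1list h1
  have hG : pvGroup1 (PySem.List.sorted (PySem.Set.ofList pos1list)
      (fun v => (PySem.List.index? pos1list v).getD 0))
      = (pvRuns (PySem.List.dedup pos1list)).map pvRangeF := by
    rw [hl1]; exact pvGroup1_eq _ hd
  have hflat : (pvGroup1 (PySem.List.sorted (PySem.Set.ofList pos1list)
      (fun v => (PySem.List.index? pos1list v).getD 0))).flatMap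
        (pvRecA pos1list pos2list binsize)
      = (pvRuns (PySem.List.dedup pos1list)).flatMap
          (pvRecB pos1list pos2list binsize (pvFirst1 pos1list) (pvLast1 pos1list)) := by
    rw [hG, List.flatMap_map]
    exact pv_flatMap_congr _ _ _ (fun r hrr => pv_rec_eq pos1list pos2list binsize ⟨h1, h2⟩ r hrr)
  have hne : (pvGroup1 (PySem.List.sorted (PySem.Set.ofList pos1list)
      (fun v => (PySem.List.index? pos1list v).getD 0))).flatMap
        (pvRecA pos1list pos2list binsize) ≠ [] := by
    rw [hflat]
    obtain ⟨r0, rest, hcons⟩ := List.exists_cons_of_ne_nil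
      (pvRuns_ne_nil (PySem.List.dedup pos1list))
    rw [hcons, List.flatMap_cons]
    intro hnil
    rcases List.append_eq_nil_iff.mp hnil with ⟨hb, _⟩
    exact pv_recB_ne_nil pos1list pos2list binsize _ _ r0 hb
  rw [pv_A_eq pos1list pos2list binsize hne, pv_B_eq pos1list pos2list binsize ⟨h1, h2⟩, hflat]
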